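-- pv_equiv track=rewrite | github.com/zzeuui/AlgorithmStudy | 13_DFS_BFS/q21.py | solution
-- ===== SOURCE A (Python) =====
-- from collections import deque
--
-- def solution(n, l, r, A):
--
--     direction = [(-1, 0),(1, 0),(0, -1),(0, 1)]
--
--     day = -1
--
--     while True:
--         #하루
--         day += 1
--         group = 0
--         visited = [[0]*n for _ in range(n)]
--         for i in range(n):
--             for j in range(n):
--
--                 #하나의 연합
--                 if visited[i][j] == 0:
--
--                     group += 1
--                     total = 0
--                     cnt = list()
--
--                     q = deque()
--                     q.append((i, j))
--                     visited[i][j] = 1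
--                     total += A[i][j]
--                     cnt.append((i, j))
--
--                     while q:
--                         x, y = q.popleft()
--                         for dx, dy in direction:
--                             nx, ny = x+dx, y+dy
--                             # 인접 나라 접근
--                             if nx >= 0 and nx < n and ny >= 0 and ny < n and visited[nx][ny] == 0:
--                                 # 차이 검사
--                                 diff = abs(A[x][y] - A[nx][ny])
--                                 # 조건에 맞으면 연합에 포함
--                                 if diff >= l and diff <= r:
--                                     q.append((nx, ny))
--                                     visited[nx][ny] = 1
--                                     total += A[nx][ny]
--                                     cnt.append((nx, ny))
--
--                     new_num = total // len(cnt)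
--                     for cx, cy in cnt:
--                         A[cx][cy] = new_num
--
--         # 연합의 수가 모든 나라 수와 같으면 중단, 연합 안 인구 이동x
--         if group == n*n:
--             break
--
--     return day
-- ===== SOURCE B (Python) =====
-- def solution(n, l, r, A):
--     # Kruskal-style union of partition blocks per day (no BFS/queue/visited grid):
--     # collect qualifying right/down edges, merge equivalence-class blocks along them,
--     # then average each block. Mutates A in place like the original; equal return value.
--     day = -1
--     while True:
--         day += 1
--         edges = []
--         for i in range(n):
--             for j in range(n):
--                 if j + 1 < n and l <= abs(A[i][j] - A[i][j + 1]) <= r: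
--                     edges.append(((i, j), (i, j + 1)))
--                 if i + 1 < n and l <= abs(A[i][j] - A[i + 1][j]) <= r:
--                     edges.append(((i, j), (i + 1, j)))
--         if not edges:
--             return day
--         blocks = [[(i, j)] for i in range(n) for j in range(n)]
--         for u, v in edges:
--             bu = next(b for b in blocks if u in b)
--             bv = next(b for b in blocks if v in b)
--             if bu != bv:
--                 blocks = [b for b in blocks if b != bu and b != bv] + [bu + bv]
--         for b in blocks:
--             w = sum(A[x][y] for x, y in b) // len(b)
--             for x, y in b:
--                 A[x][y] = w
-- ===== Notes on version B (the rewrite author's own statement) =====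
-- stated objective: alternative
-- what changed: Each day's unions are computed Kruskal-style: collect the qualifying right/down edges of the grid into a list, merge equivalence-class blocks of a partition along those edges, then average each block and stop when the edge list is empty, instead of the original's per-cell deque BFS flood fill with a visited matrix.
import Mathlib
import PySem

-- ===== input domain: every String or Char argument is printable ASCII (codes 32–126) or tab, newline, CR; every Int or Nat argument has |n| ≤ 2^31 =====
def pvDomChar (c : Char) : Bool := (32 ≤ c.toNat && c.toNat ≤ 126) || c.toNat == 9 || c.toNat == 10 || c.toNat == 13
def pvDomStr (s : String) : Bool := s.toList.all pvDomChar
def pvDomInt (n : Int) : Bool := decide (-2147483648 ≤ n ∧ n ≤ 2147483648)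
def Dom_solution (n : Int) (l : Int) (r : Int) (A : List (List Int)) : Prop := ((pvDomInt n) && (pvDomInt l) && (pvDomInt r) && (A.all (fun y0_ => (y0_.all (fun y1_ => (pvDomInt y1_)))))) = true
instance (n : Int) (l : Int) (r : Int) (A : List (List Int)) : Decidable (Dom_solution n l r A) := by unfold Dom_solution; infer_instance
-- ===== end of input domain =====

-- B replaces the per-cell deque-BFS flood fill by a Kruskal-style union of partition
-- blocks along an explicitly collected edge list, then averages each block; equivalence
-- is about the RETURN value only (the Python original mutates A in place, and so does B).

-- shared primitives (grid access/update, totality fuel — scaffolding, not algorithm)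
def pvGetV (g : List (List Int)) (c : Int × Int) : Int :=
  PySem.List.pyGetD (PySem.List.pyGetD g c.1 []) c.2 0

def pvSetCell (g : List (List Int)) (c : Int × Int) (v : Int) : List (List Int) :=
  PySem.List.pySetD g c.1 (PySem.List.pySetD (PySem.List.pyGetD g c.1 []) c.2 v)

-- generous upper bound on the number of days the Python loop can run (totality fuel only)
def pvFuel (n : Int) (A : List (List Int)) : Nat :=
  let N := n.toNat * n.toNat
  let mx := A.flatten.foldl max 0
  let mn := A.flatten.foldl min 0
  let s := (mx - mn).toNat
  (N * s + 1) * (N * s * s + 1) + 2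

-- ===== PORT A =====
def pvDirs : List (Int × Int) := [(-1, 0), (1, 0), (0, -1), (0, 1)]

def pvBfsStep (n l r : Int) (g : List (List Int)) (x y : Int)
    (st : List (Int × Int) × PySem.Set (Int × Int) × Int × List (Int × Int)) (d : Int × Int) :
    List (Int × Int) × PySem.Set (Int × Int) × Int × List (Int × Int) :=
  let q := st.1; let vis := st.2.1; let total := st.2.2.1; let cnt := st.2.2.2
  let nx := x + d.1
  let ny := y + d.2
  if 0 ≤ nx ∧ nx < n ∧ 0 ≤ ny ∧ ny < n ∧ ¬ (vis.contains (nx, ny) = true) then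
    let diff := |pvGetV g (x, y) - pvGetV g (nx, ny)|
    if l ≤ diff ∧ diff ≤ r then
      (q ++ [(nx, ny)], vis.add (nx, ny), total + pvGetV g (nx, ny), cnt ++ [(nx, ny)])
    else st
  else st

def pvBfs (n l r : Int) (g : List (List Int)) :
    Nat → List (Int × Int) → PySem.Set (Int × Int) → Int → List (Int × Int) →
    PySem.Set (Int × Int) × Int × List (Int × Int)
  | 0, _, vis, total, cnt => (vis, total, cnt)
  | _ + 1, [], vis, total, cnt => (vis, total, cnt)
  | fuel + 1, (x, y) :: qrest, vis, total, cnt =>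
      let st := pvDirs.foldl (pvBfsStep n l r g x y) (qrest, vis, total, cnt)
      pvBfs n l r g fuel st.1 st.2.1 st.2.2.1 st.2.2.2

def pvCellA (n l r : Int) (st : Int × PySem.Set (Int × Int) × List (List Int)) (c : Int × Int) :
    Int × PySem.Set (Int × Int) × List (List Int) :=
  let group := st.1; let vis := st.2.1; let g := st.2.2
  if vis.contains c = true then st
  else
    let res := pvBfs n l r g (2 * n.toNat * n.toNat + 2) [c] (vis.add c) (pvGetV g c) [c]
    let total := res.2.1
    let cnt := res.2.2
    let newNum := PySem.Int.floordiv total (PySem.List.len cnt)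
    (group + 1, res.1, cnt.foldl (fun g c => pvSetCell g c newNum) g)

def pvDayA (n l r : Int) (g : List (List Int)) : Int × PySem.Set (Int × Int) × List (List Int) :=
  (PySem.List.pyRange 0 n 1).foldl (fun st i =>
    (PySem.List.pyRange 0 n 1).foldl (fun st j => pvCellA n l r st (i, j)) st)
    (0, PySem.Set.empty, g)

def pvLoopA (n l r : Int) : Nat → List (List Int) → Int → Int
  | 0, _, day => day
  | fuel + 1, g, day =>
      let day := day + 1
      let res := pvDayA n l r g
      if res.1 = n * n then day else pvLoopA n l r fuel res.2.2 day

def solution (n : Int) (l : Int) (r : Int) (A : List (List Int)) : Int :=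
  pvLoopA n l r (pvFuel n A) A (-1)

-- ===== PORT B =====
def pvCells (n : Int) : List (Int × Int) :=
  (PySem.List.pyRange 0 n 1).flatMap (fun i => (PySem.List.pyRange 0 n 1).map (fun j => (i, j)))

def pvEdges (n l r : Int) (g : List (List Int)) : List ((Int × Int) × (Int × Int)) :=
  (PySem.List.pyRange 0 n 1).foldl (fun es i =>
    (PySem.List.pyRange 0 n 1).foldl (fun es j =>
      let es := if j + 1 < n ∧ l ≤ |pvGetV g (i, j) - pvGetV g (i, j + 1)| ∧
                    |pvGetV g (i, j) - pvGetV g (i, j + 1)| ≤ r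
                then es ++ [((i, j), (i, j + 1))] else es
      if i + 1 < n ∧ l ≤ |pvGetV g (i, j) - pvGetV g (i + 1, j)| ∧
          |pvGetV g (i, j) - pvGetV g (i + 1, j)| ≤ r
      then es ++ [((i, j), (i + 1, j))] else es) es) []

def pvMergeB (u v : Int × Int) (P : List (List (Int × Int))) : List (List (Int × Int)) :=
  match P.find? (fun b => decide (u ∈ b)), P.find? (fun b => decide (v ∈ b)) with
  | some bu, some bv =>
      if bu = bv then P
      else (P.filter (fun b => decide (b ≠ bu) && decide (b ≠ bv))) ++ [bu ++ bv]
  | _, _ => P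

def pvWriteB (h : List (List Int)) (b : List (Int × Int)) : List (List Int) :=
  let w := PySem.Int.floordiv ((b.map (fun c => pvGetV h c)).sum) (PySem.List.len b)
  b.foldl (fun h c => pvSetCell h c w) h

def pvLoopB (n l r : Int) : Nat → List (List Int) → Int → Int
  | 0, _, day => day
  | fuel + 1, g, day =>
      let day := day + 1
      let es := pvEdges n l r g
      if es = [] then day
      else
        let P := es.foldl (fun P e => pvMergeB e.1 e.2 P) ((pvCells n).map (fun c => [c]))
        pvLoopB n l r fuel (P.foldl pvWriteB g) day

def solution_alt (n : Int) (l : Int) (r : Int) (A : List (List Int)) : Int :=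
  pvLoopB n l r (pvFuel n A) A (-1)

-- ===== PRECONDITION & SPEC =====
-- Pre_ excludes exactly the inputs where the Python A raises (n exceeding the grid shape:
-- IndexError) or never terminates (negative n, or l ≤ 0 together with at least one
-- adjacent in-range pair whose difference lies in [l, r], which re-merges forever).
def Pre_solution (n : Int) (l : Int) (r : Int) (A : List (List Int)) : Prop :=
  0 ≤ n ∧ n ≤ (A.length : Int) ∧
  (∀ row ∈ A.take n.toNat, n ≤ (row.length : Int)) ∧
  (1 ≤ l ∨ ∀ i ∈ PySem.List.pyRange 0 n 1, ∀ j ∈ PySem.List.pyRange 0 n 1, ∀ d ∈ pvDirs,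
    (0 ≤ i + d.1 ∧ i + d.1 < n ∧ 0 ≤ j + d.2 ∧ j + d.2 < n) →
    ¬ (l ≤ |pvGetV A (i, j) - pvGetV A (i + d.1, j + d.2)| ∧
       |pvGetV A (i, j) - pvGetV A (i + d.1, j + d.2)| ≤ r))
instance (n : Int) (l : Int) (r : Int) (A : List (List Int)) : Decidable (Pre_solution n l r A) := by
  unfold Pre_solution; infer_instance

def pvWitness_solution : Int × Int × Int × List (List Int) := (2, 20, 50, [[50, 30], [20, 40]])

def Spec_solution (n : Int) (l : Int) (r : Int) (A : List (List Int)) (out : Int) : Prop := out = solution_alt n l r A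
instance (n : Int) (l : Int) (r : Int) (A : List (List Int)) (out : Int) : Decidable (Spec_solution n l r A out) := by unfold Spec_solution; infer_instance

-- ===== CLAIM (what is proved, stated in full; the proofs are below) =====
def Claim_equal_solution : Prop := ∀ (n : Int) (l : Int) (r : Int) (A : List (List Int)), Dom_solution n l r A → Pre_solution n l r A → Spec_solution n l r A (solution n l r A)

-- ===== LEMMAS AND PROOFS =====


-- ===== basic set / cell lemmas =====
theorem pv_contains_add (s : PySem.Set (Int × Int)) (x c : Int × Int) :
    (s.add x).contains c = (s.contains c || decide (c = x)) := by
  by_cases hx : s.contains x = true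
  · by_cases hc : c = x
    · subst hc
      simp only [PySem.Set.add, hx, if_true]
      simp [hx]
    · simp only [PySem.Set.add, hx, if_true]
      simp [hc]
  · simp only [PySem.Set.add, hx, if_false]
    simp [PySem.Set.contains, List.contains_eq_mem, List.mem_append]

theorem pv_contains_empty (c : Int × Int) :
    (PySem.Set.empty : PySem.Set (Int × Int)).contains c = false := by
  simp [PySem.Set.contains, PySem.Set.empty]

def pvInR (n : Int) (c : Int × Int) : Prop := 0 ≤ c.1 ∧ c.1 < n ∧ 0 ≤ c.2 ∧ c.2 < n

def pvNbrs (x y : Int) : List (Int × Int) := [(x - 1, y), (x + 1, y), (x, y - 1), (x, y + 1)]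

def pvE (n l r : Int) (g : List (List Int)) (u v : Int × Int) : Prop :=
  pvInR n v ∧ v ∈ pvNbrs u.1 u.2 ∧ l ≤ |pvGetV g u - pvGetV g v| ∧ |pvGetV g u - pvGetV g v| ≤ r

def pvClosed (n l r : Int) (g : List (List Int)) (V : (Int × Int) → Bool)
    (T : (Int × Int) → Prop) : Prop :=
  ∀ u v, T u → pvE n l r g u v → V v = false → T v

def pvClosed0 (n l r : Int) (g : List (List Int)) (T : (Int × Int) → Prop) : Prop :=
  ∀ u v, T u → pvE n l r g u v → T v

def pvUnvis (n : Int) (vis : PySem.Set (Int × Int)) : Nat :=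
  ((pvCells n).filter (fun c => !vis.contains c)).length

theorem mem_pvCells (n : Int) (c : Int × Int) : c ∈ pvCells n ↔ pvInR n c := by
  obtain ⟨i, j⟩ := c
  simp only [pvCells, List.mem_flatMap, List.mem_map, PySem.List.mem_pyRange_one, pvInR]
  constructor
  · rintro ⟨a, ha, b, hb, heq⟩
    cases heq
    exact ⟨ha.1, ha.2, hb.1, hb.2⟩
  · rintro ⟨h1, h2, h3, h4⟩
    exact ⟨i, ⟨h1, h2⟩, j, ⟨h3, h4⟩, rfl⟩

theorem nodup_pvCells (n : Int) : (pvCells n).Nodup := by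
  apply List.nodup_flatMap.2
  constructor
  · intro x _
    exact (PySem.List.nodup_pyRange_one 0 n).map (fun a b h => by simpa using h)
  · apply List.Pairwise.imp ?_ (PySem.List.pairwise_lt_pyRange_one 0 n)
    intro a b hab c hca hcb
    simp only [List.mem_map] at hca hcb
    obtain ⟨j1, _, h1⟩ := hca
    obtain ⟨j2, _, h2⟩ := hcb
    rw [← h1] at h2
    cases h2
    omega

theorem length_pvCells (n : Int) : (pvCells n).length = n.toNat * n.toNat := by
  simp only [pvCells, List.length_flatMap, List.length_map, PySem.List.length_pyRange_one]
  rw [List.map_const', List.sum_replicate, PySem.List.length_pyRange_one, smul_eq_mul, Int.sub_zero]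

theorem pvUnvis_le (n : Int) (vis : PySem.Set (Int × Int)) :
    pvUnvis n vis ≤ n.toNat * n.toNat := by
  rw [← length_pvCells]; exact List.length_filter_le _ _

theorem pvUnvis_add (n : Int) (vis : PySem.Set (Int × Int)) (v : Int × Int)
    (hin : pvInR n v) (hnv : vis.contains v = false) :
    pvUnvis n (vis.add v) + 1 = pvUnvis n vis := by
  unfold pvUnvis
  have h1 : ((pvCells n).filter (fun c => !(vis.add v).contains c))
      = ((pvCells n).filter (fun c => !vis.contains c)).filter (fun c => c != v) := by
    rw [List.filter_filter]
    apply List.filter_congr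
    intro c _
    rw [pv_contains_add]
    cases hc : vis.contains c
    · by_cases hcv : c = v <;> simp [hcv, bne]
    · by_cases hcv : c = v
      · subst hcv; rw [hc] at hnv; cases hnv
      · simp [hcv, hc, bne]
  rw [h1]
  have hnd : ((pvCells n).filter (fun c => !vis.contains c)).Nodup := (nodup_pvCells n).filter _
  have hv : v ∈ (pvCells n).filter (fun c => !vis.contains c) := by
    rw [List.mem_filter]; exact ⟨(mem_pvCells n v).2 hin, by simp only [hnv, Bool.not_false]⟩
  rw [← List.Nodup.erase_eq_filter hnd v]
  exact List.length_erase_add_one hv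

-- geometry
theorem pvNbrs_symm (u v : Int × Int) : u ∈ pvNbrs v.1 v.2 ↔ v ∈ pvNbrs u.1 u.2 := by
  obtain ⟨a, b⟩ := u; obtain ⟨c, d⟩ := v
  simp [pvNbrs, Prod.ext_iff]; omega

theorem pvNbrs_ne (x y : Int) (v : Int × Int) (h : v ∈ pvNbrs x y) : v ≠ (x, y) := by
  simp only [pvNbrs, List.mem_cons, List.not_mem_nil, or_false] at h
  rcases h with h | h | h | h <;> subst h <;> simp [Prod.ext_iff] <;> omega

theorem pvDirs_mem_nbrs (x y : Int) : ∀ d ∈ pvDirs, (x + d.1, y + d.2) ∈ pvNbrs x y := by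
  intro d hd
  simp only [pvDirs, List.mem_cons, List.not_mem_nil, or_false] at hd
  rcases hd with h | h | h | h <;> subst h <;> simp [pvNbrs, Prod.ext_iff] <;> omega

theorem pvNbrs_exists_dir (x y : Int) (v : Int × Int) (h : v ∈ pvNbrs x y) :
    ∃ d ∈ pvDirs, v = (x + d.1, y + d.2) := by
  simp only [pvNbrs, List.mem_cons, List.not_mem_nil, or_false] at h
  rcases h with h | h | h | h <;> subst h
  · exact ⟨(-1, 0), by simp [pvDirs], by simp [Prod.ext_iff] <;> omega⟩
  · exact ⟨(1, 0), by simp [pvDirs], by simp [Prod.ext_iff] <;> omega⟩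
  · exact ⟨(0, -1), by simp [pvDirs], by simp [Prod.ext_iff] <;> omega⟩
  · exact ⟨(0, 1), by simp [pvDirs], by simp [Prod.ext_iff] <;> omega⟩

theorem pvE_symm (n l r : Int) (g : List (List Int)) (u v : Int × Int)
    (hu : pvInR n u) (h : pvE n l r g u v) : pvE n l r g v u := by
  obtain ⟨h1, h2, h3, h4⟩ := h
  refine ⟨hu, (pvNbrs_symm u v).2 h2, ?_, ?_⟩ <;> rw [abs_sub_comm] <;> assumption

theorem pvE_congr (n l r : Int) (g g' : List (List Int)) (u v : Int × Int)
    (hu : pvGetV g u = pvGetV g' u) (hv : pvGetV g v = pvGetV g' v) :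
    pvE n l r g u v ↔ pvE n l r g' u v := by
  unfold pvE; rw [hu, hv]

-- grid reads after writes
theorem pvSetCell_nonneg (g : List (List Int)) (c : Int × Int) (v : Int)
    (h1 : 0 ≤ c.1) (h2 : 0 ≤ c.2) :
    pvSetCell g c v = g.set c.1.toNat ((g[c.1.toNat]?.getD []).set c.2.toNat v) := by
  unfold pvSetCell PySem.List.pyGetD
  rw [PySem.List.pySetD_of_nonneg _ _ h1, PySem.List.pySetD_of_nonneg _ _ h2,
      PySem.List.pyGet?_of_nonneg _ h1]

theorem pvSetCell_comm2 (g : List (List Int)) (a b : Int × Int) (va vb : Int)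
    (ha1 : 0 ≤ a.1) (ha2 : 0 ≤ a.2) (hb1 : 0 ≤ b.1) (hb2 : 0 ≤ b.2)
    (hv : a = b → va = vb) :
    pvSetCell (pvSetCell g a va) b vb = pvSetCell (pvSetCell g b vb) a va := by
  by_cases hab : a = b
  · subst hab; rw [hv rfl]
  rw [pvSetCell_nonneg g a va ha1 ha2, pvSetCell_nonneg g b vb hb1 hb2,
      pvSetCell_nonneg _ b vb hb1 hb2, pvSetCell_nonneg _ a va ha1 ha2]
  by_cases hrow : a.1.toNat = b.1.toNat
  · rw [hrow]
    by_cases hlen : b.1.toNat < g.length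
    · have e1 : ∀ R : List Int, (g.set b.1.toNat R)[b.1.toNat]? = some R :=
        fun R => List.getElem?_set_self (by simpa using hlen)
      rw [e1, e1]
      simp only [Option.getD_some]
      rw [List.set_set, List.set_set]
      have hcol : a.2.toNat ≠ b.2.toNat := by
        have : a.1 = b.1 := by omega
        have : a.2 ≠ b.2 := fun h2 => hab (Prod.ext this h2)
        omega
      rw [List.set_comm _ _ hcol]
    · have hl : g.length ≤ b.1.toNat := by omega
      simp [List.set_eq_of_length_le hl]
  · have e1 : ∀ R : List Int, (g.set a.1.toNat R)[b.1.toNat]? = g[b.1.toNat]? :=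
      fun R => List.getElem?_set_ne hrow
    have e2 : ∀ R : List Int, (g.set b.1.toNat R)[a.1.toNat]? = g[a.1.toNat]? :=
      fun R => List.getElem?_set_ne (Ne.symm hrow)
    rw [e1, e2, List.set_comm _ _ hrow]


theorem pvGetV_nonneg (g : List (List Int)) (x : Int × Int) (hx1 : 0 ≤ x.1) (hx2 : 0 ≤ x.2) :
    pvGetV g x = ((g[x.1.toNat]?.getD [])[x.2.toNat]?).getD 0 := by
  unfold pvGetV PySem.List.pyGetD
  rw [PySem.List.pyGet?_of_nonneg _ hx1, PySem.List.pyGet?_of_nonneg _ hx2]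

theorem pvGetV_setCell_ne (g : List (List Int)) (a x : Int × Int) (v : Int)
    (hx1 : 0 ≤ x.1) (hx2 : 0 ≤ x.2) (ha1 : 0 ≤ a.1) (ha2 : 0 ≤ a.2) (hne : x ≠ a) :
    pvGetV (pvSetCell g a v) x = pvGetV g x := by
  rw [pvSetCell_nonneg g a v ha1 ha2, pvGetV_nonneg _ x hx1 hx2, pvGetV_nonneg g x hx1 hx2]
  by_cases hrow : x.1.toNat = a.1.toNat
  · have hxa : x.1 = a.1 := by omega
    have hcol : x.2.toNat ≠ a.2.toNat := by
      have : x.2 ≠ a.2 := fun h2 => hne (Prod.ext hxa h2)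
      omega
    by_cases hlen : a.1.toNat < g.length
    · rw [hrow, List.getElem?_set_self (by simpa using hlen)]
      simp only [Option.getD_some]
      rw [List.getElem?_set_ne (Ne.symm hcol)]
    · have hl : g.length ≤ a.1.toNat := by omega
      simp [List.set_eq_of_length_le hl]
  · rw [List.getElem?_set_ne (Ne.symm hrow)]

theorem pvGetV_writes_ne (ws : List (Int × Int)) (f : (Int × Int) → Int)
    (g : List (List Int)) (x : Int × Int)
    (hx1 : 0 ≤ x.1) (hx2 : 0 ≤ x.2)
    (hws : ∀ a ∈ ws, 0 ≤ a.1 ∧ 0 ≤ a.2 ∧ a ≠ x) :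
    pvGetV (ws.foldl (fun h a => pvSetCell h a (f a)) g) x = pvGetV g x := by
  induction ws generalizing g with
  | nil => rfl
  | cons a ws ih =>
      obtain ⟨h1, h2, h3⟩ := hws a (by simp)
      rw [List.foldl_cons, ih _ (fun b hb => hws b (by simp [hb])),
          pvGetV_setCell_ne g a x _ hx1 hx2 h1 h2 (Ne.symm h3)]



-- ===== BFS (port A) invariant machinery =====
structure pvInvA (n l r : Int) (g : List (List Int)) (V : PySem.Set (Int × Int)) (s : Int × Int)
    (q : List (Int × Int)) (vis : PySem.Set (Int × Int)) (total : Int)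
    (cnt : List (Int × Int)) : Prop where
  nodup : cnt.Nodup
  seed : s ∈ cnt
  cells : ∀ c ∈ cnt, pvInR n c ∧ V.contains c = false
  vischar : ∀ c, vis.contains c = (V.contains c || decide (c ∈ cnt))
  total_eq : total = (cnt.map (pvGetV g)).sum
  processed : ∀ u ∈ cnt, u ∉ q → ∀ v, pvE n l r g u v → vis.contains v = true
  qsub : ∀ u ∈ q, u ∈ cnt
  qnodup : q.Nodup
  minimal : ∀ T : (Int × Int) → Prop, T s → pvClosed n l r g (fun x => V.contains x) T →
    ∀ c ∈ cnt, T c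

theorem pvBfsStep_eq (n l r : Int) (g : List (List Int)) (x y : Int)
    (q : List (Int × Int)) (vis : PySem.Set (Int × Int)) (total : Int)
    (cnt : List (Int × Int)) (d : Int × Int) :
    pvBfsStep n l r g x y (q, vis, total, cnt) d =
      if 0 ≤ x + d.1 ∧ x + d.1 < n ∧ 0 ≤ y + d.2 ∧ y + d.2 < n ∧
          ¬ (vis.contains (x + d.1, y + d.2) = true) then
        if l ≤ |pvGetV g (x, y) - pvGetV g (x + d.1, y + d.2)| ∧
            |pvGetV g (x, y) - pvGetV g (x + d.1, y + d.2)| ≤ r then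
          (q ++ [(x + d.1, y + d.2)], vis.add (x + d.1, y + d.2),
           total + pvGetV g (x + d.1, y + d.2), cnt ++ [(x + d.1, y + d.2)])
        else (q, vis, total, cnt)
      else (q, vis, total, cnt) := rfl

theorem pvDirsFold (n l r : Int) (g : List (List Int)) (V : PySem.Set (Int × Int)) (s : Int × Int)
    (x y : Int) :
    ∀ (ds : List (Int × Int)), (∀ d ∈ ds, (x + d.1, y + d.2) ∈ pvNbrs x y) →
    ∀ (q : List (Int × Int)) (vis : PySem.Set (Int × Int)) (total : Int) (cnt : List (Int × Int)),
      pvInvA n l r g V s ((x, y) :: q) vis total cnt →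
      ∀ res, res = ds.foldl (pvBfsStep n l r g x y) (q, vis, total, cnt) →
      pvInvA n l r g V s ((x, y) :: res.1) res.2.1 res.2.2.1 res.2.2.2 ∧
      (∀ c, vis.contains c = true → res.2.1.contains c = true) ∧
      (∀ d ∈ ds, pvInR n (x + d.1, y + d.2) →
        l ≤ |pvGetV g (x, y) - pvGetV g (x + d.1, y + d.2)| →
        |pvGetV g (x, y) - pvGetV g (x + d.1, y + d.2)| ≤ r →
        res.2.1.contains (x + d.1, y + d.2) = true) ∧
      res.1.length + 2 * pvUnvis n res.2.1 ≤ q.length + 2 * pvUnvis n vis := by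
  intro ds
  induction ds with
  | nil =>
      intro _ q vis total cnt hInv res hres
      subst hres
      exact ⟨hInv, fun c hc => hc, by simp, le_refl _⟩
  | cons d ds ih =>
      intro hds q vis total cnt hInv res hres
      have hdnbr : (x + d.1, y + d.2) ∈ pvNbrs x y := hds d (by simp)
      have hds' : ∀ d' ∈ ds, (x + d'.1, y + d'.2) ∈ pvNbrs x y := fun d' hd' => hds d' (by simp [hd'])
      rw [List.foldl_cons, pvBfsStep_eq] at hres
      by_cases h1 : 0 ≤ x + d.1 ∧ x + d.1 < n ∧ 0 ≤ y + d.2 ∧ y + d.2 < n ∧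
          ¬ (vis.contains (x + d.1, y + d.2) = true)
      · rw [if_pos h1] at hres
        by_cases h2 : l ≤ |pvGetV g (x, y) - pvGetV g (x + d.1, y + d.2)| ∧
            |pvGetV g (x, y) - pvGetV g (x + d.1, y + d.2)| ≤ r
        · -- the neighbour is added
          rw [if_pos h2] at hres
          have htIn : pvInR n (x + d.1, y + d.2) := ⟨h1.1, h1.2.1, h1.2.2.1, h1.2.2.2.1⟩
          have htVis : vis.contains (x + d.1, y + d.2) = false := by
            cases hv : vis.contains (x + d.1, y + d.2)
            · rfl
            · exact absurd hv h1.2.2.2.2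
          have htchar := hInv.vischar (x + d.1, y + d.2)
          rw [htVis] at htchar
          have htV : V.contains (x + d.1, y + d.2) = false := by
            cases hV : V.contains (x + d.1, y + d.2)
            · rfl
            · rw [hV] at htchar; simp at htchar
          have htCnt : (x + d.1, y + d.2) ∉ cnt := by
            intro hmem
            rw [htV] at htchar; simp [hmem] at htchar
          have hxycnt : (x, y) ∈ cnt := hInv.qsub (x, y) (by simp)
          have hInv' : pvInvA n l r g V s ((x, y) :: (q ++ [(x + d.1, y + d.2)]))
              (vis.add (x + d.1, y + d.2))
              (total + pvGetV g (x + d.1, y + d.2)) (cnt ++ [(x + d.1, y + d.2)]) := by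
            refine { nodup := ?_, seed := ?_, cells := ?_, vischar := ?_, total_eq := ?_,
                     processed := ?_, qsub := ?_, qnodup := ?_, minimal := ?_ }
            · exact List.nodup_append.2 ⟨hInv.nodup, List.nodup_singleton _,
                fun a ha b hb => by simp at hb; subst hb; exact fun h => htCnt (h ▸ ha)⟩
            · exact List.mem_append_left _ hInv.seed
            · intro c hc
              rcases List.mem_append.1 hc with h | h
              · exact hInv.cells c h
              · simp at h; subst h; exact ⟨htIn, htV⟩
            · intro c
              rw [pv_contains_add, hInv.vischar c]
              by_cases hc : c = (x + d.1, y + d.2) <;>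
                by_cases hm : c ∈ cnt <;> simp [hc, hm]
            · simp [hInv.total_eq]
            · intro u hu hnq v hEv
              rcases List.mem_append.1 hu with h | h
              · have hnq' : u ∉ (x, y) :: q := by
                  intro hm
                  apply hnq
                  rcases List.mem_cons.1 hm with h' | h'
                  · simp [h']
                  · simp [List.mem_append.2 (Or.inl h')]
                have := hInv.processed u h hnq' v hEv
                rw [pv_contains_add, this]; rfl
              · simp at h; subst h
                exact absurd (by simp : (x + d.1, y + d.2) ∈ (x,y) :: (q ++ [(x + d.1, y + d.2)])) hnq
            · intro u hu
              rcases List.mem_cons.1 hu with h | h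
              · subst h; exact List.mem_append_left _ hxycnt
              · rcases List.mem_append.1 h with h' | h'
                · exact List.mem_append_left _ (hInv.qsub u (by simp [h']))
                · simp at h'; subst h'; exact List.mem_append_right _ (by simp)
            · have hq := hInv.qnodup
              have hxq : (x, y) ∉ q := (List.nodup_cons.1 hq).1
              have hqn : q.Nodup := (List.nodup_cons.1 hq).2
              have htq : (x + d.1, y + d.2) ∉ q := fun h => htCnt (hInv.qsub _ (by simp [h]))
              have htxy : (x + d.1, y + d.2) ≠ (x, y) := fun h => htCnt (h ▸ hxycnt)
              refine List.nodup_cons.2 ⟨?_, List.nodup_append.2 ⟨hqn, List.nodup_singleton _, ?_⟩⟩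
              · intro hm
                rcases List.mem_append.1 hm with h | h
                · exact hxq h
                · simp [Prod.ext_iff] at h
                  exact htxy (by simp [Prod.ext_iff]; omega)
              · intro a ha b hb; simp at hb; subst hb
                intro h; exact htq (h ▸ ha)
            · intro T hTs hTc c hc
              rcases List.mem_append.1 hc with h | h
              · exact hInv.minimal T hTs hTc c h
              · simp at h; subst h
                exact hTc (x, y) _ (hInv.minimal T hTs hTc _ hxycnt)
                  ⟨htIn, hdnbr, h2.1, h2.2⟩ htV
          obtain ⟨ha, hb, hc, hd⟩ := ih hds' _ _ _ _ hInv' res hres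
          refine ⟨ha, ?_, ?_, ?_⟩
          · intro c hcv
            apply hb
            rw [pv_contains_add, hcv]; rfl
          · intro d' hd'
            rcases List.mem_cons.1 hd' with h | h
            · subst h
              intro _ _ _
              apply hb
              rw [pv_contains_add]; simp
            · exact hc d' h
          · have := pvUnvis_add n vis (x + d.1, y + d.2) htIn htVis
            simp at hd ⊢
            omega
        · rw [if_neg h2] at hres
          obtain ⟨ha, hb, hc, hd⟩ := ih hds' _ _ _ _ hInv res hres
          refine ⟨ha, hb, ?_, hd⟩
          intro d' hd'
          rcases List.mem_cons.1 hd' with h | h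
          · subst h; intro _ hl hr; exact absurd ⟨hl, hr⟩ h2
          · exact hc d' h
      · rw [if_neg h1] at hres
        obtain ⟨ha, hb, hc, hd⟩ := ih hds' _ _ _ _ hInv res hres
        refine ⟨ha, hb, ?_, hd⟩
        intro d' hd'
        rcases List.mem_cons.1 hd' with h | h
        · subst h
          intro hin hl hr
          have hcv : vis.contains (x + d'.1, y + d'.2) = true := by
            by_contra hcv'
            exact h1 ⟨hin.1, hin.2.1, hin.2.2.1, hin.2.2.2, hcv'⟩
          exact hb _ hcv
        · exact hc d' h

theorem pvBfs_spec (n l r : Int) (g : List (List Int)) (V : PySem.Set (Int × Int))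
    (s : Int × Int) :
    ∀ (fuel : Nat) (q : List (Int × Int)) (vis : PySem.Set (Int × Int)) (total : Int)
      (cnt : List (Int × Int)),
      pvInvA n l r g V s q vis total cnt →
      q.length + 2 * pvUnvis n vis ≤ fuel →
      pvInvA n l r g V s [] (pvBfs n l r g fuel q vis total cnt).1
        (pvBfs n l r g fuel q vis total cnt).2.1 (pvBfs n l r g fuel q vis total cnt).2.2 := by
  intro fuel
  induction fuel with
  | zero =>
      intro q vis total cnt hInv hfuel
      have hq : q = [] := by
        cases q with
        | nil => rfl
        | cons a as => simp at hfuel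
      subst hq
      exact hInv
  | succ fuel ih =>
      intro q vis total cnt hInv hfuel
      cases q with
      | nil => exact hInv
      | cons hd tl =>
          obtain ⟨x, y⟩ := hd
          have hInv1 : pvInvA n l r g V s ((x, y) :: tl) vis total cnt := hInv
          obtain ⟨ha, hb, hc, hd⟩ := pvDirsFold n l r g V s x y pvDirs (pvDirs_mem_nbrs x y)
            tl vis total cnt hInv1 _ rfl
          set st := pvDirs.foldl (pvBfsStep n l r g x y) (tl, vis, total, cnt) with hst
          have hxycnt : (x, y) ∈ st.2.2.2 := ha.qsub (x, y) (by simp)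
          have hInv2 : pvInvA n l r g V s st.1 st.2.1 st.2.2.1 st.2.2.2 := by
            refine { nodup := ha.nodup, seed := ha.seed, cells := ha.cells,
                     vischar := ha.vischar, total_eq := ha.total_eq,
                     processed := ?_, qsub := ?_, qnodup := (List.nodup_cons.1 ha.qnodup).2,
                     minimal := ha.minimal }
            · intro u hu hnq v hEv
              by_cases hxy : u = (x, y)
              · subst hxy
                obtain ⟨d, hdmem, hdv⟩ := pvNbrs_exists_dir x y v hEv.2.1
                subst hdv
                exact hc d hdmem hEv.1 hEv.2.2.1 hEv.2.2.2
              · exact ha.processed u hu (by simp [hxy, hnq]) v hEv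
            · intro u hu
              exact ha.qsub u (by simp [hu])
          have hfuel2 : st.1.length + 2 * pvUnvis n st.2.1 ≤ fuel := by
            simp at hfuel hd
            omega
          have := ih st.1 st.2.1 st.2.2.1 st.2.2.2 hInv2 hfuel2
          simpa [pvBfs, ← hst] using this

theorem pvInvA_final_closed (n l r : Int) (g : List (List Int)) (V : PySem.Set (Int × Int))
    (s : Int × Int) (vis : PySem.Set (Int × Int)) (total : Int) (cnt : List (Int × Int))
    (h : pvInvA n l r g V s [] vis total cnt) :
    pvClosed n l r g (fun x => V.contains x) (· ∈ cnt) := by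
  intro u v hu hEv hV
  have hV' : V.contains v = false := hV
  have := h.processed u hu (by simp) v hEv
  rw [h.vischar v, hV'] at this
  simpa using this

theorem pvComponentA (n l r : Int) (g : List (List Int)) (V : PySem.Set (Int × Int))
    (c : Int × Int) (hin : pvInR n c) (hc : V.contains c = false) :
    pvInvA n l r g V c []
      (pvBfs n l r g (2 * n.toNat * n.toNat + 2) [c] (V.add c) (pvGetV g c) [c]).1
      (pvBfs n l r g (2 * n.toNat * n.toNat + 2) [c] (V.add c) (pvGetV g c) [c]).2.1
      (pvBfs n l r g (2 * n.toNat * n.toNat + 2) [c] (V.add c) (pvGetV g c) [c]).2.2 := by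
  apply pvBfs_spec
  · refine { nodup := List.nodup_singleton c, seed := by simp,
             cells := ?_, vischar := ?_, total_eq := by simp,
             processed := ?_, qsub := by simp, qnodup := List.nodup_singleton c,
             minimal := ?_ }
    · intro x hx; simp at hx; subst hx; exact ⟨hin, hc⟩
    · intro x
      rw [pv_contains_add]
      by_cases hx : x = c <;> simp [hx]
    · intro u hu hnq v hEv
      simp at hu
      subst hu
      simp at hnq
    · intro T hTs _ x hx; simp at hx; subst hx; exact hTs
  · have := pvUnvis_le n (V.add c)
    have h2 : 2 * n.toNat * n.toNat = 2 * (n.toNat * n.toNat) := by ring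
    simp
    omega


-- ===== connected components on a fixed grid =====
def pvComp (n l r : Int) (g : List (List Int)) (c : Int × Int) : List (Int × Int) :=
  (pvBfs n l r g (2 * n.toNat * n.toNat + 2) [c] (PySem.Set.add PySem.Set.empty c)
    (pvGetV g c) [c]).2.2

theorem pvComp_invA (n l r : Int) (g : List (List Int)) (c : Int × Int) (hin : pvInR n c) :
    pvInvA n l r g PySem.Set.empty c []
      (pvBfs n l r g (2 * n.toNat * n.toNat + 2) [c] (PySem.Set.add PySem.Set.empty c)
        (pvGetV g c) [c]).1
      (pvBfs n l r g (2 * n.toNat * n.toNat + 2) [c] (PySem.Set.add PySem.Set.empty c)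
        (pvGetV g c) [c]).2.1
      (pvComp n l r g c) :=
  pvComponentA n l r g PySem.Set.empty c hin (pv_contains_empty c)

theorem pvComp_seed (n l r : Int) (g : List (List Int)) (c : Int × Int) (hin : pvInR n c) :
    c ∈ pvComp n l r g c := (pvComp_invA n l r g c hin).seed

theorem pvComp_nodup (n l r : Int) (g : List (List Int)) (c : Int × Int) (hin : pvInR n c) :
    (pvComp n l r g c).Nodup := (pvComp_invA n l r g c hin).nodup

theorem pvComp_inR (n l r : Int) (g : List (List Int)) (c : Int × Int) (hin : pvInR n c) :
    ∀ x ∈ pvComp n l r g c, pvInR n x :=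
  fun x hx => ((pvComp_invA n l r g c hin).cells x hx).1

theorem pvComp_closed (n l r : Int) (g : List (List Int)) (c : Int × Int) (hin : pvInR n c) :
    ∀ u v, u ∈ pvComp n l r g c → pvE n l r g u v → v ∈ pvComp n l r g c := by
  intro u v hu hE
  exact pvInvA_final_closed n l r g PySem.Set.empty c _ _ _ (pvComp_invA n l r g c hin)
    u v hu hE (pv_contains_empty v)

theorem pvComp_minimal (n l r : Int) (g : List (List Int)) (c : Int × Int) (hin : pvInR n c)
    (T : (Int × Int) → Prop) (hTs : T c) (hTc : pvClosed0 n l r g T) :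
    ∀ x ∈ pvComp n l r g c, T x := by
  refine (pvComp_invA n l r g c hin).minimal T hTs ?_
  intro u v hu hE _
  exact hTc u v hu hE

theorem pvComp_mem_symm (n l r : Int) (g : List (List Int)) (a x : Int × Int)
    (hin : pvInR n a) (hx : x ∈ pvComp n l r g a) : a ∈ pvComp n l r g x := by
  have := pvComp_minimal n l r g a hin (fun u => pvInR n u ∧ a ∈ pvComp n l r g u)
    ⟨hin, pvComp_seed n l r g a hin⟩ ?_ x hx
  · exact this.2
  · intro u v hu hE
    have hvin : pvInR n v := hE.1
    have hEvu : pvE n l r g v u := pvE_symm n l r g u v hu.1 hE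
    have huv : u ∈ pvComp n l r g v :=
      pvComp_closed n l r g v hvin v u (pvComp_seed n l r g v hvin) hEvu
    refine ⟨hvin, ?_⟩
    have : ∀ y ∈ pvComp n l r g u, y ∈ pvComp n l r g v :=
      pvComp_minimal n l r g u hu.1 (· ∈ pvComp n l r g v) huv
        (fun w z hw hEz => pvComp_closed n l r g v hvin w z hw hEz)
    exact this a hu.2

theorem pvComp_subset (n l r : Int) (g : List (List Int)) (a b : Int × Int)
    (hin : pvInR n a) (hb : b ∈ pvComp n l r g a) :
    ∀ x ∈ pvComp n l r g b, x ∈ pvComp n l r g a := by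
  have hbin : pvInR n b := pvComp_inR n l r g a hin b hb
  exact pvComp_minimal n l r g b hbin (· ∈ pvComp n l r g a) hb
    (fun w z hw hEz => pvComp_closed n l r g a hin w z hw hEz)

theorem pvComp_eq_of_mem (n l r : Int) (g : List (List Int)) (a b x : Int × Int)
    (hina : pvInR n a) (hinb : pvInR n b)
    (hxa : x ∈ pvComp n l r g a) (hxb : x ∈ pvComp n l r g b) :
    ∀ y, y ∈ pvComp n l r g a ↔ y ∈ pvComp n l r g b := by
  have hinx : pvInR n x := pvComp_inR n l r g a hina x hxa
  have hax : a ∈ pvComp n l r g x := pvComp_mem_symm n l r g a x hina hxa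
  have hbx : b ∈ pvComp n l r g x := pvComp_mem_symm n l r g b x hinb hxb
  intro y
  constructor
  · intro hy
    exact pvComp_subset n l r g b x hinb hxb y
      (pvComp_subset n l r g x a hinx hax y hy)
  · intro hy
    exact pvComp_subset n l r g a x hina hxa y
      (pvComp_subset n l r g x b hinx hbx y hy)

theorem pvComp_perm (n l r : Int) (g : List (List Int)) (a b : Int × Int)
    (hina : pvInR n a) (hb : b ∈ pvComp n l r g a) :
    (pvComp n l r g b).Perm (pvComp n l r g a) := by
  have hinb : pvInR n b := pvComp_inR n l r g a hina b hb
  have hba : b ∈ pvComp n l r g b := pvComp_seed n l r g b hinb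
  refine (List.perm_ext_iff_of_nodup (pvComp_nodup n l r g b hinb)
    (pvComp_nodup n l r g a hina)).2 ?_
  exact pvComp_eq_of_mem n l r g b a b hinb hina hba hb

theorem pvComp_singleton (n l r : Int) (g : List (List Int)) (c : Int × Int) (hin : pvInR n c)
    (h : ∀ v, ¬ pvE n l r g c v) : pvComp n l r g c = [c] := by
  have hall : ∀ x ∈ pvComp n l r g c, x = c := by
    refine pvComp_minimal n l r g c hin (· = c) rfl ?_
    intro u v hu hE
    subst hu
    exact absurd hE (h v)
  have hc := pvComp_seed n l r g c hin
  cases hcomp : pvComp n l r g c with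
  | nil => rw [hcomp] at hc; cases hc
  | cons x xs =>
      have hx : x = c := hall x (by rw [hcomp]; simp)
      cases xs with
      | nil => simp [hcomp, hx]
      | cons y ys =>
          have hy : y = c := hall y (by rw [hcomp]; simp)
          have hnd := pvComp_nodup n l r g c hin
          rw [hcomp, hx, hy] at hnd
          simp at hnd

def pvNoEdge (n l r : Int) (g : List (List Int)) : Prop :=
  ∀ c, pvInR n c → ∀ v, ¬ pvE n l r g c v

def pvVal (n l r : Int) (g : List (List Int)) (c : Int × Int) : Int :=
  PySem.Int.floordiv (((pvComp n l r g c).map (pvGetV g)).sum)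
    (PySem.List.len (pvComp n l r g c))

theorem pvVal_eq_of_mem (n l r : Int) (g : List (List Int)) (a x : Int × Int)
    (hina : pvInR n a) (hx : x ∈ pvComp n l r g a) :
    pvVal n l r g x = pvVal n l r g a := by
  have hperm := pvComp_perm n l r g a x hina hx
  unfold pvVal
  rw [(hperm.map (pvGetV g)).sum_eq]
  simp [PySem.List.len_eq, hperm.length_eq]


-- ===== the BFS of port A, run mid-day, computes the day-start component =====
theorem pvUnvis_addList (n : Int) (vis vis' : PySem.Set (Int × Int)) (K : List (Int × Int))
    (hKnd : K.Nodup) (hKin : ∀ a ∈ K, pvInR n a ∧ vis.contains a = false)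
    (hchar : ∀ x, vis'.contains x = (vis.contains x || decide (x ∈ K))) :
    pvUnvis n vis' + K.length = pvUnvis n vis := by
  unfold pvUnvis
  have h1 : ((pvCells n).filter (fun c => !vis'.contains c))
      = ((pvCells n).filter (fun c => !vis.contains c)).filter (fun c => !decide (c ∈ K)) := by
    rw [List.filter_filter]
    apply List.filter_congr
    intro c _
    rw [hchar c]
    cases hv : vis.contains c <;> by_cases hk : c ∈ K <;> simp [hk]
  rw [h1]
  have hAnd : ((pvCells n).filter (fun c => !vis.contains c)).Nodup := (nodup_pvCells n).filter _
  have hsplit : ((pvCells n).filter (fun c => !vis.contains c)).length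
      = (((pvCells n).filter (fun c => !vis.contains c)).filter
          (fun c => decide (c ∈ K))).length
      + (((pvCells n).filter (fun c => !vis.contains c)).filter
          (fun c => !decide (c ∈ K))).length :=
    List.length_eq_length_filter_add (fun c => decide (c ∈ K))
  have hKA : (((pvCells n).filter (fun c => !vis.contains c)).filter
      (fun c => decide (c ∈ K))).length = K.length := by
    apply List.Perm.length_eq
    refine (List.perm_ext_iff_of_nodup (hAnd.filter _) hKnd).2 ?_
    intro x
    simp only [List.mem_filter, decide_eq_true_eq]
    constructor
    · rintro ⟨_, hx⟩; exact hx
    · intro hx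
      obtain ⟨hin, hv⟩ := hKin x hx
      exact ⟨⟨(mem_pvCells n x).2 hin,
        by simpa [PySem.Set.contains, List.contains_eq_mem] using hv⟩, hx⟩
  omega

theorem pv_two_mem_length {α : Type} (L : List α) (hnd : L.Nodup) (a b : α)
    (ha : a ∈ L) (hb : b ∈ L) (hne : a ≠ b) : 2 ≤ L.length := by
  cases L with
  | nil => cases ha
  | cons x xs =>
      cases xs with
      | nil =>
          simp at ha hb
          exact absurd (ha.trans hb.symm) hne
      | cons y ys => simp only [List.length_cons]; omega

theorem pvCellA_eq (n l r gr : Int) (vis : PySem.Set (Int × Int)) (g : List (List Int))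
    (c : Int × Int) :
    pvCellA n l r (gr, vis, g) c =
      if vis.contains c = true then (gr, vis, g)
      else
        (gr + 1,
         (pvBfs n l r g (2 * n.toNat * n.toNat + 2) [c] (vis.add c) (pvGetV g c) [c]).1,
         (pvBfs n l r g (2 * n.toNat * n.toNat + 2) [c] (vis.add c) (pvGetV g c) [c]).2.2.foldl
           (fun gg cc => pvSetCell gg cc
             (PySem.Int.floordiv
               (pvBfs n l r g (2 * n.toNat * n.toNat + 2) [c] (vis.add c) (pvGetV g c) [c]).2.1
               (PySem.List.len
                 (pvBfs n l r g (2 * n.toNat * n.toNat + 2) [c] (vis.add c) (pvGetV g c) [c]).2.2)))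
           g) := rfl

theorem pvCellA_comp (n l r : Int) (g0 gk : List (List Int)) (vis : PySem.Set (Int × Int))
    (c : Int × Int) (hin : pvInR n c) (hvc : vis.contains c = false)
    (hclosed : ∀ x, vis.contains x = true →
      pvInR n x ∧ ∀ y ∈ pvComp n l r g0 x, vis.contains y = true)
    (hg : ∀ x, pvInR n x → vis.contains x = false → pvGetV gk x = pvGetV g0 x) :
    (∀ x, x ∈ (pvBfs n l r gk (2 * n.toNat * n.toNat + 2) [c] (vis.add c)
        (pvGetV gk c) [c]).2.2 ↔ x ∈ pvComp n l r g0 c) ∧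
    ((pvBfs n l r gk (2 * n.toNat * n.toNat + 2) [c] (vis.add c)
        (pvGetV gk c) [c]).2.2).Perm (pvComp n l r g0 c) ∧
    (pvBfs n l r gk (2 * n.toNat * n.toNat + 2) [c] (vis.add c)
        (pvGetV gk c) [c]).2.1 = ((pvComp n l r g0 c).map (pvGetV g0)).sum ∧
    (∀ x, ((pvBfs n l r gk (2 * n.toNat * n.toNat + 2) [c] (vis.add c)
        (pvGetV gk c) [c]).1).contains x
      = (vis.contains x || decide (x ∈ pvComp n l r g0 c))) ∧
    (∀ y ∈ pvComp n l r g0 c, vis.contains y = false) := by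
  have hInv := pvComponentA n l r gk vis c hin hvc
  set res := pvBfs n l r gk (2 * n.toNat * n.toNat + 2) [c] (vis.add c) (pvGetV gk c) [c]
    with hres
  -- any cell of the day-start component of c is unvisited
  have hcompUnvis : ∀ y ∈ pvComp n l r g0 c, vis.contains y = false := by
    intro y hy
    by_contra hv
    have hvy : vis.contains y = true := by
      cases h : vis.contains y
      · exact absurd h hv
      · rfl
    have hcy : c ∈ pvComp n l r g0 y := pvComp_mem_symm n l r g0 c y hin hy
    have := (hclosed y hvy).2 c hcy
    rw [hvc] at this
    cases this
  -- membership equality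
  have hmem : ∀ x, x ∈ res.2.2 ↔ x ∈ pvComp n l r g0 c := by
    intro x
    constructor
    · -- res ⊆ comp, by minimality of res
      refine hInv.minimal (· ∈ pvComp n l r g0 c) (pvComp_seed n l r g0 c hin) ?_ x
      intro u v hu hE hVv
      have huU : vis.contains u = false := hcompUnvis u hu
      have huin : pvInR n u := pvComp_inR n l r g0 c hin u hu
      have hvin : pvInR n v := hE.1
      have hE0 : pvE n l r g0 u v := by
        rw [← pvE_congr n l r gk g0 u v (hg u huin huU) (hg v hvin hVv)]
        exact hE
      exact pvComp_closed n l r g0 c hin u v hu hE0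
    · -- comp ⊆ res, by minimality of the component
      intro hx
      refine pvComp_minimal n l r g0 c hin (· ∈ res.2.2) hInv.seed ?_ x hx
      intro u v hu hE0
      have hcells := hInv.cells u hu
      cases hVv : vis.contains v with
      | false =>
          have hE : pvE n l r gk u v := by
            rw [pvE_congr n l r gk g0 u v (hg u hcells.1 hcells.2) (hg v hE0.1 hVv)]
            exact hE0
          exact pvInvA_final_closed n l r gk vis c _ _ _ hInv u v hu hE hVv
      | true =>
          exfalso
          have hvin : pvInR n v := hE0.1
          have hEvu : pvE n l r g0 v u := pvE_symm n l r g0 u v hcells.1 hE0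
          have huv : u ∈ pvComp n l r g0 v :=
            pvComp_closed n l r g0 v hvin v u (pvComp_seed n l r g0 v hvin) hEvu
          have := (hclosed v hVv).2 u huv
          rw [hcells.2] at this
          cases this
  refine ⟨hmem, ?_, ?_, ?_, hcompUnvis⟩
  · exact (List.perm_ext_iff_of_nodup hInv.nodup
      (pvComp_nodup n l r g0 c hin)).2 hmem
  · have hperm : res.2.2.Perm (pvComp n l r g0 c) :=
      (List.perm_ext_iff_of_nodup hInv.nodup (pvComp_nodup n l r g0 c hin)).2 hmem
    rw [hInv.total_eq]
    have hmapeq : res.2.2.map (pvGetV gk) = res.2.2.map (pvGetV g0) :=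
      List.map_congr_left
        (fun x hx => hg x (hInv.cells x hx).1 (hInv.cells x hx).2)
    rw [hmapeq, (hperm.map (pvGetV g0)).sum_eq]
  · intro x
    rw [hInv.vischar x]
    congr 1
    simp only [decide_eq_decide]
    exact hmem x


-- ===== the fold of port A over one day =====
structure pvDayInv (n l r : Int) (g0 : List (List Int)) (done : List (Int × Int))
    (st : Int × PySem.Set (Int × Int) × List (List Int)) : Prop where
  vischar : ∀ x, st.2.1.contains x = true ↔ ∃ s ∈ done, x ∈ pvComp n l r g0 s
  gagree : ∀ x, pvInR n x → st.2.1.contains x = false → pvGetV st.2.2 x = pvGetV g0 x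
  gform : ∃ W : List (Int × Int), W.Nodup ∧ (∀ x, x ∈ W ↔ st.2.1.contains x = true) ∧
    st.2.2 = W.foldl (fun h a => pvSetCell h a (pvVal n l r g0 a)) g0
  gcount : ∃ gn : Nat, st.1 = (gn : Int) ∧ gn + pvUnvis n st.2.1 ≤ n.toNat * n.toNat ∧
    (pvNoEdge n l r g0 → gn + pvUnvis n st.2.1 = n.toNat * n.toNat) ∧
    (∀ u0 v0, pvInR n u0 → pvE n l r g0 u0 v0 → st.2.1.contains u0 = true →
      gn + pvUnvis n st.2.1 + 1 ≤ n.toNat * n.toNat)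

theorem pvDayInv_init (n l r : Int) (g0 : List (List Int)) :
    pvDayInv n l r g0 [] (0, PySem.Set.empty, g0) := by
  refine { vischar := ?_, gagree := ?_, gform := ?_, gcount := ?_ }
  · intro x; simp [pv_contains_empty]
  · intro x _ _; rfl
  · exact ⟨[], List.nodup_nil, by intro x; simp [pv_contains_empty], rfl⟩
  · refine ⟨0, rfl, ?_, ?_, ?_⟩
    · simpa using pvUnvis_le n PySem.Set.empty
    · intro _
      have : pvUnvis n PySem.Set.empty = n.toNat * n.toNat := by
        unfold pvUnvis
        rw [List.filter_eq_self.2 (fun c _ => by simp [pv_contains_empty]), length_pvCells]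
      simpa using this
    · intro u0 v0 _ _ h
      rw [pv_contains_empty] at h
      cases h

theorem pvDayInv_step (n l r : Int) (g0 : List (List Int)) (done : List (Int × Int))
    (c : Int × Int) (cs : List (Int × Int)) (hsplit : done ++ c :: cs = pvCells n)
    (st : Int × PySem.Set (Int × Int) × List (List Int))
    (hInv : pvDayInv n l r g0 done st) :
    pvDayInv n l r g0 (done ++ [c]) (pvCellA n l r st c) := by
  obtain ⟨gr, vis, gk⟩ := st
  have hcmem : c ∈ pvCells n := by rw [← hsplit]; simp
  have hcin : pvInR n c := (mem_pvCells n c).1 hcmem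
  have hdoneIn : ∀ s ∈ done, pvInR n s := by
    intro s hs
    exact (mem_pvCells n s).1 (by rw [← hsplit]; exact List.mem_append_left _ hs)
  have hclosed : ∀ x, vis.contains x = true →
      pvInR n x ∧ ∀ y ∈ pvComp n l r g0 x, vis.contains y = true := by
    intro x hx
    obtain ⟨s, hs, hxs⟩ := (hInv.vischar x).1 hx
    have hsin : pvInR n s := hdoneIn s hs
    have hxin : pvInR n x := pvComp_inR n l r g0 s hsin x hxs
    refine ⟨hxin, ?_⟩
    intro y hy
    exact (hInv.vischar y).2 ⟨s, hs, pvComp_subset n l r g0 s x hsin hxs y hy⟩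
  rw [pvCellA_eq]
  by_cases hv : vis.contains c = true
  · rw [if_pos hv]
    obtain ⟨s0, hs0, hcs0⟩ := (hInv.vischar c).1 hv
    refine { vischar := ?_, gagree := hInv.gagree, gform := hInv.gform, gcount := hInv.gcount }
    intro x
    rw [hInv.vischar x]
    constructor
    · rintro ⟨s, hs, hxs⟩; exact ⟨s, List.mem_append_left _ hs, hxs⟩
    · rintro ⟨s, hs, hxs⟩
      rcases List.mem_append.1 hs with h | h
      · exact ⟨s, h, hxs⟩
      · simp at h
        exact ⟨s0, hs0, pvComp_subset n l r g0 s0 c (hdoneIn s0 hs0) hcs0 x (h ▸ hxs)⟩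
  · rw [if_neg hv]
    have hv' : vis.contains c = false := by
      cases h : vis.contains c
      · rfl
      · exact absurd h hv
    obtain ⟨hmem, hperm, htot, hvchar, hunv⟩ :=
      pvCellA_comp n l r g0 gk vis c hcin hv' hclosed (fun x h1 h2 => hInv.gagree x h1 h2)
    set res := pvBfs n l r gk (2 * n.toNat * n.toNat + 2) [c] (vis.add c) (pvGetV gk c) [c]
      with hres
    have hcompnd : (pvComp n l r g0 c).Nodup := pvComp_nodup n l r g0 c hcin
    have hresnd : res.2.2.Nodup := (hperm.nodup_iff).2 hcompnd
    have hcompin : ∀ y ∈ pvComp n l r g0 c, pvInR n y := pvComp_inR n l r g0 c hcin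
    have hnum : PySem.Int.floordiv res.2.1 (PySem.List.len res.2.2) = pvVal n l r g0 c := by
      unfold pvVal
      rw [htot]
      simp [PySem.List.len_eq, hperm.length_eq]
    have hUnv : pvUnvis n res.1 + (pvComp n l r g0 c).length = pvUnvis n vis :=
      pvUnvis_addList n vis res.1 (pvComp n l r g0 c) hcompnd
        (fun a ha => ⟨hcompin a ha, hunv a ha⟩) hvchar
    have hlenpos : 0 < (pvComp n l r g0 c).length :=
      List.length_pos_of_mem (pvComp_seed n l r g0 c hcin)
    refine { vischar := ?_, gagree := ?_, gform := ?_, gcount := ?_ }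
    · intro x
      rw [hvchar x]
      constructor
      · intro h
        rcases Bool.or_eq_true_iff.1 h with h | h
        · obtain ⟨s, hs, hxs⟩ := (hInv.vischar x).1 h
          exact ⟨s, List.mem_append_left _ hs, hxs⟩
        · exact ⟨c, List.mem_append_right _ (by simp), of_decide_eq_true h⟩
      · rintro ⟨s, hs, hxs⟩
        rcases List.mem_append.1 hs with h | h
        · exact Bool.or_eq_true_iff.2 (Or.inl ((hInv.vischar x).2 ⟨s, h, hxs⟩))
        · simp at h
          exact Bool.or_eq_true_iff.2 (Or.inr (decide_eq_true (h ▸ hxs)))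
    · intro x hxin hxf
      have h0 : (vis.contains x || decide (x ∈ pvComp n l r g0 c)) = false := by
        rw [← hvchar x]; exact hxf
      rw [Bool.or_eq_false_iff] at h0
      have h1 : vis.contains x = false ∧ x ∉ pvComp n l r g0 c :=
        ⟨h0.1, fun hm => by simp [hm] at h0⟩
      have hwr : pvGetV (res.2.2.foldl (fun gg cc => pvSetCell gg cc
          (PySem.Int.floordiv res.2.1 (PySem.List.len res.2.2))) gk) x = pvGetV gk x := by
        exact pvGetV_writes_ne res.2.2
          (fun _ => PySem.Int.floordiv res.2.1 (PySem.List.len res.2.2)) gk x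
          hxin.1 hxin.2.2.1
          (fun a ha => by
            have hac : a ∈ pvComp n l r g0 c := (hmem a).1 ha
            have hain := hcompin a hac
            exact ⟨hain.1, hain.2.2.1, fun h => h1.2 (h ▸ hac)⟩)
      rw [hwr]
      exact hInv.gagree x hxin h1.1
    · obtain ⟨W, hWnd, hWchar, hWform⟩ := hInv.gform
      refine ⟨W ++ res.2.2, ?_, ?_, ?_⟩
      · refine List.nodup_append.2 ⟨hWnd, hresnd, ?_⟩
        intro a ha b hb hab
        subst hab
        have h1 : vis.contains a = true := (hWchar a).1 ha
        have h2 : vis.contains a = false := hunv a ((hmem a).1 hb)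
        rw [h1] at h2; cases h2
      · intro x
        rw [hvchar x]
        constructor
        · intro h
          rcases List.mem_append.1 h with h | h
          · exact Bool.or_eq_true_iff.2 (Or.inl ((hWchar x).1 h))
          · exact Bool.or_eq_true_iff.2 (Or.inr (decide_eq_true ((hmem x).1 h)))
        · intro h
          rcases Bool.or_eq_true_iff.1 h with h | h
          · exact List.mem_append_left _ ((hWchar x).2 h)
          · exact List.mem_append_right _ ((hmem x).2 (of_decide_eq_true h))
      · show res.2.2.foldl (fun gg cc => pvSetCell gg cc
            (PySem.Int.floordiv res.2.1 (PySem.List.len res.2.2))) gk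
          = (W ++ res.2.2).foldl (fun h a => pvSetCell h a (pvVal n l r g0 a)) g0
        rw [List.foldl_append, ← hWform]
        apply PySem.List.foldl_congr_mem
        intro acc x hx
        rw [hnum, pvVal_eq_of_mem n l r g0 c x hcin ((hmem x).1 hx)]
    · obtain ⟨gn, hgr, hle, hNE, hedge⟩ := hInv.gcount
      have hle' : gn + pvUnvis n vis ≤ n.toNat * n.toNat := hle
      have hNE' : pvNoEdge n l r g0 → gn + pvUnvis n vis = n.toNat * n.toNat := hNE
      have hedge' : ∀ u0 v0, pvInR n u0 → pvE n l r g0 u0 v0 → vis.contains u0 = true →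
          gn + pvUnvis n vis + 1 ≤ n.toNat * n.toNat := hedge
      refine ⟨gn + 1, ?_, ?_, ?_, ?_⟩
      · show gr + 1 = ((gn + 1 : Nat) : Int)
        rw [show gr = (gn : Int) from hgr]
        push_cast; ring
      · show gn + 1 + pvUnvis n res.1 ≤ n.toNat * n.toNat
        omega
      · intro hne
        have hsing : pvComp n l r g0 c = [c] :=
          pvComp_singleton n l r g0 c hcin (fun v => hne c hcin v)
        have := hNE' hne
        rw [hsing] at hUnv
        simp at hUnv
        show gn + 1 + pvUnvis n res.1 = n.toNat * n.toNat
        omega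
      · intro u0 v0 hu0in hE hu0vis
        show gn + 1 + pvUnvis n res.1 + 1 ≤ n.toNat * n.toNat
        rw [hvchar u0] at hu0vis
        rcases Bool.or_eq_true_iff.1 hu0vis with h | h
        · have := hedge' u0 v0 hu0in hE h
          omega
        · have hu0c : u0 ∈ pvComp n l r g0 c := of_decide_eq_true h
          have hv0u0 : v0 ∈ pvComp n l r g0 u0 :=
            pvComp_closed n l r g0 u0 hu0in u0 v0 (pvComp_seed n l r g0 u0 hu0in) hE
          have hv0c : v0 ∈ pvComp n l r g0 c :=
            pvComp_subset n l r g0 c u0 hcin hu0c v0 hv0u0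
          have hne : u0 ≠ v0 := by
            have := pvNbrs_ne u0.1 u0.2 v0 hE.2.1
            intro h'
            exact this (by rw [← h'])
          have h2 : 2 ≤ (pvComp n l r g0 c).length :=
            pv_two_mem_length _ hcompnd u0 v0 hu0c hv0c hne
          omega

theorem pvDayInv_fold (n l r : Int) (g0 : List (List Int)) :
    ∀ (cs done : List (Int × Int)) (st : Int × PySem.Set (Int × Int) × List (List Int)),
      done ++ cs = pvCells n → pvDayInv n l r g0 done st →
      pvDayInv n l r g0 (pvCells n) (cs.foldl (pvCellA n l r) st) := by
  intro cs
  induction cs with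
  | nil =>
      intro done st hsplit hInv
      rw [List.append_nil] at hsplit
      rw [List.foldl_nil, ← hsplit]
      exact hInv
  | cons c cs ih =>
      intro done st hsplit hInv
      rw [List.foldl_cons]
      exact ih (done ++ [c]) _ (by simpa using hsplit)
        (pvDayInv_step n l r g0 done c cs hsplit st hInv)

theorem pv_foldl_pairs {β : Type} (li lj : List Int) (f : β → Int × Int → β) (st : β) :
    (li.flatMap (fun i => lj.map (fun j => (i, j)))).foldl f st
      = li.foldl (fun st i => lj.foldl (fun st j => f st (i, j)) st) st := by
  induction li generalizing st with
  | nil => rfl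
  | cons i li ih => simp [List.flatMap_cons, List.foldl_append, List.foldl_map, ih]

theorem pvDayA_eq_cells (n l r : Int) (g : List (List Int)) :
    pvDayA n l r g = (pvCells n).foldl (pvCellA n l r) (0, PySem.Set.empty, g) := by
  unfold pvDayA pvCells
  exact (pv_foldl_pairs _ _ _ _).symm

theorem pvDayA_final (n l r : Int) (g0 : List (List Int)) :
    pvDayInv n l r g0 (pvCells n) (pvDayA n l r g0) := by
  rw [pvDayA_eq_cells]
  exact pvDayInv_fold n l r g0 (pvCells n) [] _ rfl (pvDayInv_init n l r g0)

theorem pvDayA_all_visited (n l r : Int) (g0 : List (List Int)) :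
    ∀ x, pvInR n x → (pvDayA n l r g0).2.1.contains x = true := by
  intro x hx
  exact ((pvDayA_final n l r g0).vischar x).2
    ⟨x, (mem_pvCells n x).2 hx, pvComp_seed n l r g0 x hx⟩

theorem pvDayA_unvis_zero (n l r : Int) (g0 : List (List Int)) :
    pvUnvis n (pvDayA n l r g0).2.1 = 0 := by
  unfold pvUnvis
  rw [List.filter_eq_nil_iff.2, List.length_nil]
  intro c hc
  rw [pvDayA_all_visited n l r g0 c ((mem_pvCells n c).1 hc)]
  simp

theorem pvDayA_stable_iff (n l r : Int) (g0 : List (List Int)) (hn : 0 ≤ n) :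
    (pvDayA n l r g0).1 = n * n ↔ pvNoEdge n l r g0 := by
  obtain ⟨gn, hgr, hle, hNE, hedge⟩ := (pvDayA_final n l r g0).gcount
  have hU := pvDayA_unvis_zero n l r g0
  have hcast : (n * n : Int) = ((n.toNat * n.toNat : Nat) : Int) := by
    push_cast
    rw [Int.toNat_of_nonneg hn]
  constructor
  · intro hst
    by_contra hne
    unfold pvNoEdge at hne
    push_neg at hne
    obtain ⟨c, hcin, v, hEv⟩ := hne
    have hvis := pvDayA_all_visited n l r g0 c hcin
    have := hedge c v hcin hEv hvis
    rw [hgr, hcast] at hst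
    have : gn = n.toNat * n.toNat := by exact_mod_cast hst
    omega
  · intro hne
    have := hNE hne
    rw [hgr, hcast]
    exact_mod_cast by omega

theorem pvDayA_grid (n l r : Int) (g0 : List (List Int)) :
    ∃ W : List (Int × Int), W.Perm (pvCells n) ∧
      (pvDayA n l r g0).2.2
        = W.foldl (fun h a => pvSetCell h a (pvVal n l r g0 a)) g0 := by
  obtain ⟨W, hWnd, hWchar, hWform⟩ := (pvDayA_final n l r g0).gform
  refine ⟨W, ?_, hWform⟩
  refine (List.perm_ext_iff_of_nodup hWnd (nodup_pvCells n)).2 ?_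
  intro x
  rw [hWchar x, mem_pvCells]
  constructor
  · intro h
    obtain ⟨s, hs, hxs⟩ := ((pvDayA_final n l r g0).vischar x).1 h
    exact pvComp_inR n l r g0 s ((mem_pvCells n s).1 hs) x hxs
  · intro h
    exact pvDayA_all_visited n l r g0 x h


-- ===== the edge list of port B =====
def pvECand (n l r : Int) (g : List (List Int)) (c : Int × Int) :
    List ((Int × Int) × (Int × Int)) :=
  (if c.2 + 1 < n ∧ l ≤ |pvGetV g c - pvGetV g (c.1, c.2 + 1)| ∧
      |pvGetV g c - pvGetV g (c.1, c.2 + 1)| ≤ r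
   then [(c, (c.1, c.2 + 1))] else [])
  ++ (if c.1 + 1 < n ∧ l ≤ |pvGetV g c - pvGetV g (c.1 + 1, c.2)| ∧
      |pvGetV g c - pvGetV g (c.1 + 1, c.2)| ≤ r
   then [(c, (c.1 + 1, c.2))] else [])

theorem pvEdges_eq (n l r : Int) (g : List (List Int)) :
    pvEdges n l r g = (pvCells n).flatMap (pvECand n l r g) := by
  unfold pvEdges
  rw [show (fun (es : List ((Int × Int) × (Int × Int))) (i : Int) =>
      (PySem.List.pyRange 0 n 1).foldl (fun es j =>
        let es := if j + 1 < n ∧ l ≤ |pvGetV g (i, j) - pvGetV g (i, j + 1)| ∧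
                      |pvGetV g (i, j) - pvGetV g (i, j + 1)| ≤ r
                  then es ++ [((i, j), (i, j + 1))] else es
        if i + 1 < n ∧ l ≤ |pvGetV g (i, j) - pvGetV g (i + 1, j)| ∧
            |pvGetV g (i, j) - pvGetV g (i + 1, j)| ≤ r
        then es ++ [((i, j), (i + 1, j))] else es) es)
    = (fun es i => (PySem.List.pyRange 0 n 1).foldl
        (fun es j => es ++ pvECand n l r g (i, j)) es) from ?_]
  · rw [← pv_foldl_pairs (PySem.List.pyRange 0 n 1) (PySem.List.pyRange 0 n 1)
      (fun es c => es ++ pvECand n l r g c) []]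
    rw [PySem.List.foldl_append_eq_flatMap]
    rfl
  · funext es i
    apply PySem.List.foldl_congr_mem
    intro acc j _
    simp only [pvECand]
    split_ifs with h1 h2 h2 <;> simp

theorem mem_pvEdges (n l r : Int) (g : List (List Int)) (e : (Int × Int) × (Int × Int)) :
    e ∈ pvEdges n l r g ↔ ∃ c ∈ pvCells n, e ∈ pvECand n l r g c := by
  rw [pvEdges_eq, List.mem_flatMap]

theorem pvEdges_mem_E (n l r : Int) (g : List (List Int)) (e : (Int × Int) × (Int × Int))
    (he : e ∈ pvEdges n l r g) : pvInR n e.1 ∧ pvE n l r g e.1 e.2 := by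
  obtain ⟨c, hc, hcand⟩ := (mem_pvEdges n l r g e).1 he
  obtain ⟨h1, h2, h3, h4⟩ := (mem_pvCells n c).1 hc
  have hcin : pvInR n c := ⟨h1, h2, h3, h4⟩
  unfold pvECand at hcand
  rcases List.mem_append.1 hcand with h | h
  · split_ifs at h with hcond
    · simp only [List.mem_singleton] at h
      subst h
      refine ⟨hcin, ⟨⟨h1, h2, by show (0:Int) ≤ c.2 + 1; omega, hcond.1⟩,
        ?_, hcond.2.1, hcond.2.2⟩⟩
      show (c.1, c.2 + 1) ∈ pvNbrs c.1 c.2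
      simp [pvNbrs]
    · cases h
  · split_ifs at h with hcond
    · simp only [List.mem_singleton] at h
      subst h
      refine ⟨hcin, ⟨⟨by show (0:Int) ≤ c.1 + 1; omega, hcond.1, h3, h4⟩,
        ?_, hcond.2.1, hcond.2.2⟩⟩
      show (c.1 + 1, c.2) ∈ pvNbrs c.1 c.2
      simp [pvNbrs]
    · cases h

theorem pvE_mem_edges (n l r : Int) (g : List (List Int)) (u v : Int × Int)
    (hu : pvInR n u) (hE : pvE n l r g u v) :
    (u, v) ∈ pvEdges n l r g ∨ (v, u) ∈ pvEdges n l r g := by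
  obtain ⟨hvin, hnbr, hlb, hub⟩ := hE
  obtain ⟨hu1, hu2, hu3, hu4⟩ := hu
  obtain ⟨hv1, hv2, hv3, hv4⟩ := hvin
  rw [mem_pvEdges, mem_pvEdges]
  simp only [pvNbrs, List.mem_cons, List.not_mem_nil, or_false] at hnbr
  rcases hnbr with h | h | h | h
  · -- v = (u.1 - 1, u.2): down edge recorded at v
    right
    refine ⟨v, (mem_pvCells n v).2 ⟨hv1, hv2, hv3, hv4⟩, ?_⟩
    have hup : (v.1 + 1, v.2) = u := by
      rw [h]; exact Prod.ext (by simp) (by simp)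
    unfold pvECand
    apply List.mem_append_right
    have hva : v.1 = u.1 - 1 := by rw [h]
    rw [if_pos ⟨by omega, by rw [hup, abs_sub_comm]; exact hlb,
        by rw [hup, abs_sub_comm]; exact hub⟩]
    simp [hup]
  · -- v = (u.1 + 1, u.2): down edge recorded at u
    left
    refine ⟨u, (mem_pvCells n u).2 ⟨hu1, hu2, hu3, hu4⟩, ?_⟩
    have hdn : (u.1 + 1, u.2) = v := by
      rw [h]
    have hva : v.1 = u.1 + 1 := by rw [h]
    unfold pvECand
    apply List.mem_append_right
    rw [if_pos ⟨by omega, by rw [hdn]; exact hlb, by rw [hdn]; exact hub⟩]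
    simp [hdn]
  · -- v = (u.1, u.2 - 1): right edge recorded at v
    right
    refine ⟨v, (mem_pvCells n v).2 ⟨hv1, hv2, hv3, hv4⟩, ?_⟩
    have hup : (v.1, v.2 + 1) = u := by
      rw [h]; exact Prod.ext (by simp) (by simp)
    unfold pvECand
    apply List.mem_append_left
    have hvb : v.2 = u.2 - 1 := by rw [h]
    rw [if_pos ⟨by omega, by rw [hup, abs_sub_comm]; exact hlb,
        by rw [hup, abs_sub_comm]; exact hub⟩]
    simp [hup]
  · -- v = (u.1, u.2 + 1): right edge recorded at u
    left
    refine ⟨u, (mem_pvCells n u).2 ⟨hu1, hu2, hu3, hu4⟩, ?_⟩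
    have hdn : (u.1, u.2 + 1) = v := by
      rw [h]
    have hvb : v.2 = u.2 + 1 := by rw [h]
    unfold pvECand
    apply List.mem_append_left
    rw [if_pos ⟨by omega, by rw [hdn]; exact hlb, by rw [hdn]; exact hub⟩]
    simp [hdn]

theorem pvEdges_nil_iff (n l r : Int) (g : List (List Int)) :
    pvEdges n l r g = [] ↔ pvNoEdge n l r g := by
  constructor
  · intro h c hc v hE
    rcases pvE_mem_edges n l r g c v hc hE with hm | hm <;> rw [h] at hm <;> cases hm
  · intro hne
    rw [pvEdges_eq]
    apply List.flatMap_eq_nil_iff.2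
    intro c hc
    have hcin : pvInR n c := (mem_pvCells n c).1 hc
    unfold pvECand
    rw [if_neg ?_, if_neg ?_]
    · rfl
    · intro hcond
      exact hne c hcin (c.1 + 1, c.2)
        ⟨⟨by show (0:Int) ≤ c.1 + 1; have := hcin.1; omega, hcond.1,
          hcin.2.2.1, hcin.2.2.2⟩, by simp [pvNbrs], hcond.2.1, hcond.2.2⟩
    · intro hcond
      exact hne c hcin (c.1, c.2 + 1)
        ⟨⟨hcin.1, hcin.2.1, by show (0:Int) ≤ c.2 + 1; have := hcin.2.2.1; omega,
          hcond.1⟩, by simp [pvNbrs], hcond.2.1, hcond.2.2⟩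


-- ===== the partition of port B =====
structure pvPart (n l r : Int) (g0 : List (List Int)) (P : List (List (Int × Int))) : Prop where
  nonempty : ∀ b ∈ P, b ≠ []
  nodups : ∀ b ∈ P, b.Nodup
  disj : P.Pairwise (fun b b' => ∀ x, x ∈ b → x ∉ b')
  cover : ∀ x, x ∈ P.flatten ↔ x ∈ pvCells n
  sound : ∀ b ∈ P, ∀ x ∈ b, ∀ y ∈ b, y ∈ pvComp n l r g0 x

theorem pvPart_disj_symm (n l r : Int) (g0 : List (List Int)) (P : List (List (Int × Int)))
    (hP : pvPart n l r g0 P) (b b' : List (Int × Int)) (hb : b ∈ P) (hb' : b' ∈ P)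
    (hne : b ≠ b') : ∀ x ∈ b, x ∉ b' := by
  have hsym : Symmetric (fun (b b' : List (Int × Int)) => ∀ x, x ∈ b → x ∉ b') := by
    intro a c h x hxc hxa
    exact h x hxa hxc
  exact fun x hx => hP.disj.forall hsym hb hb' hne x hx

theorem pvPart_unique (n l r : Int) (g0 : List (List Int)) (P : List (List (Int × Int)))
    (hP : pvPart n l r g0 P) (b b' : List (Int × Int)) (hb : b ∈ P) (hb' : b' ∈ P)
    (x : Int × Int) (hx : x ∈ b) (hx' : x ∈ b') : b = b' := by
  by_contra hne
  exact pvPart_disj_symm n l r g0 P hP b b' hb hb' hne x hx hx'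

theorem pvPart_init (n l r : Int) (g0 : List (List Int)) :
    pvPart n l r g0 ((pvCells n).map (fun c => [c])) := by
  refine { nonempty := ?_, nodups := ?_, disj := ?_, cover := ?_, sound := ?_ }
  · intro b hb
    obtain ⟨c, _, hc⟩ := List.mem_map.1 hb
    rw [← hc]; simp
  · intro b hb
    obtain ⟨c, _, hc⟩ := List.mem_map.1 hb
    rw [← hc]; exact List.nodup_singleton c
  · rw [List.pairwise_map]
    apply List.Pairwise.imp_of_mem ?_ (nodup_pvCells n)
    intro a b _ _ hab x hxa hxb
    simp at hxa hxb
    exact hab (hxa.symm.trans hxb)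
  · intro x
    simp only [List.mem_flatten, List.mem_map]
    constructor
    · rintro ⟨b, ⟨c, hc, hbc⟩, hxb⟩
      rw [← hbc] at hxb
      simp at hxb
      exact hxb ▸ hc
    · intro hx
      exact ⟨[x], ⟨x, hx, rfl⟩, by simp⟩
  · intro b hb x hxb y hyb
    obtain ⟨c, hc, hbc⟩ := List.mem_map.1 hb
    rw [← hbc] at hxb hyb
    simp at hxb hyb
    rw [hxb, hyb]
    exact pvComp_seed n l r g0 c ((mem_pvCells n c).1 hc)

theorem pvMergeB_spec (n l r : Int) (g0 : List (List Int)) (u v : Int × Int)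
    (huin : pvInR n u) (hvin : pvInR n v) (hE : pvE n l r g0 u v)
    (P : List (List (Int × Int))) (hP : pvPart n l r g0 P) :
    pvPart n l r g0 (pvMergeB u v P) ∧
    (∃ b ∈ pvMergeB u v P, u ∈ b ∧ v ∈ b) ∧
    (∀ x y b, b ∈ P → x ∈ b → y ∈ b → ∃ b' ∈ pvMergeB u v P, x ∈ b' ∧ y ∈ b') := by
  have humem : u ∈ P.flatten := (hP.cover u).2 ((mem_pvCells n u).2 huin)
  have hvmem : v ∈ P.flatten := (hP.cover v).2 ((mem_pvCells n v).2 hvin)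
  obtain ⟨bu0, hbu0, hu0⟩ := List.mem_flatten.1 humem
  obtain ⟨bv0, hbv0, hv0⟩ := List.mem_flatten.1 hvmem
  have hfu : (P.find? (fun b => decide (u ∈ b))).isSome = true :=
    List.find?_isSome.2 ⟨bu0, hbu0, decide_eq_true hu0⟩
  have hfv : (P.find? (fun b => decide (v ∈ b))).isSome = true :=
    List.find?_isSome.2 ⟨bv0, hbv0, decide_eq_true hv0⟩
  obtain ⟨bu, hfindu⟩ := Option.isSome_iff_exists.1 hfu
  obtain ⟨bv, hfindv⟩ := Option.isSome_iff_exists.1 hfv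
  have hbuP : bu ∈ P := List.mem_of_find?_eq_some hfindu
  have hbvP : bv ∈ P := List.mem_of_find?_eq_some hfindv
  have hubu : u ∈ bu := by have h := List.find?_some hfindu; simpa using h
  have hvbv : v ∈ bv := by have h := List.find?_some hfindv; simpa using h
  have hmerge : pvMergeB u v P =
      if bu = bv then P
      else (P.filter (fun b => decide (b ≠ bu) && decide (b ≠ bv))) ++ [bu ++ bv] := by
    unfold pvMergeB
    rw [hfindu, hfindv]
  by_cases heq : bu = bv
  · rw [hmerge, if_pos heq]
    exact ⟨hP, ⟨bu, hbuP, hubu, heq ▸ hvbv⟩, fun x y b hb hx hy => ⟨b, hb, hx, hy⟩⟩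
  · rw [hmerge, if_neg heq]
    have hmemfilter : ∀ b ∈ P, b ≠ bu → b ≠ bv →
        b ∈ P.filter (fun b => decide (b ≠ bu) && decide (b ≠ bv)) := by
      intro b hb h1 h2
      rw [List.mem_filter]
      exact ⟨hb, by simp [h1, h2]⟩
    have hfilter_mem : ∀ b, b ∈ P.filter (fun b => decide (b ≠ bu) && decide (b ≠ bv)) →
        b ∈ P ∧ b ≠ bu ∧ b ≠ bv := by
      intro b hb
      rw [List.mem_filter] at hb
      refine ⟨hb.1, ?_, ?_⟩ <;> simp only [Bool.and_eq_true, decide_eq_true_eq] at hb <;>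
        [exact hb.2.1; exact hb.2.2]
    -- every cell of the merged block is in the component of u
    have hallu : ∀ z ∈ bu ++ bv, z ∈ pvComp n l r g0 u := by
      intro z hz
      rcases List.mem_append.1 hz with h | h
      · exact hP.sound bu hbuP u hubu z h
      · have hzv : z ∈ pvComp n l r g0 v := hP.sound bv hbvP v hvbv z h
        have hvu : v ∈ pvComp n l r g0 u :=
          pvComp_closed n l r g0 u huin u v (pvComp_seed n l r g0 u huin) hE
        exact pvComp_subset n l r g0 u v huin hvu z hzv
    refine ⟨?_, ?_, ?_⟩
    · refine { nonempty := ?_, nodups := ?_, disj := ?_, cover := ?_, sound := ?_ }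
      · intro b hb
        rcases List.mem_append.1 hb with h | h
        · exact hP.nonempty b (hfilter_mem b h).1
        · simp at h; subst h
          intro hnil
          rw [List.append_eq_nil_iff] at hnil
          exact hP.nonempty bu hbuP hnil.1
      · intro b hb
        rcases List.mem_append.1 hb with h | h
        · exact hP.nodups b (hfilter_mem b h).1
        · simp at h; subst h
          refine List.nodup_append.2 ⟨hP.nodups bu hbuP, hP.nodups bv hbvP, ?_⟩
          intro a ha a' ha' haa
          subst haa
          exact pvPart_disj_symm n l r g0 P hP bu bv hbuP hbvP heq a ha ha'
      · refine List.pairwise_append.2 ⟨hP.disj.filter _, List.pairwise_singleton _ _, ?_⟩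
        intro b hb b' hb' x hxb
        simp at hb'
        subst hb'
        obtain ⟨hbP, hbu, hbv⟩ := hfilter_mem b hb
        intro hx
        rcases List.mem_append.1 hx with h | h
        · exact pvPart_disj_symm n l r g0 P hP b bu hbP hbuP hbu x hxb h
        · exact pvPart_disj_symm n l r g0 P hP b bv hbP hbvP hbv x hxb h
      · intro x
        rw [← hP.cover x]
        simp only [List.flatten_append, List.mem_append, List.mem_flatten]
        constructor
        · rintro (⟨b, hb, hxb⟩ | hx)
          · exact ⟨b, (hfilter_mem b hb).1, hxb⟩
          · simp at hx
            rcases hx with hx | hx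
            · exact ⟨bu, hbuP, hx⟩
            · exact ⟨bv, hbvP, hx⟩
        · rintro ⟨b, hb, hxb⟩
          by_cases h1 : b = bu
          · right; subst h1; simp [List.mem_append.2 (Or.inl hxb)]
          by_cases h2 : b = bv
          · right; subst h2; simp [List.mem_append.2 (Or.inr hxb)]
          · exact Or.inl ⟨b, hmemfilter b hb h1 h2, hxb⟩
      · intro b hb x hxb y hyb
        rcases List.mem_append.1 hb with h | h
        · exact hP.sound b (hfilter_mem b h).1 x hxb y hyb
        · simp at h; subst h
          have hxu : x ∈ pvComp n l r g0 u := hallu x hxb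
          have hyu : y ∈ pvComp n l r g0 u := hallu y hyb
          have hxin : pvInR n x := pvComp_inR n l r g0 u huin x hxu
          have hux : u ∈ pvComp n l r g0 x := pvComp_mem_symm n l r g0 u x huin hxu
          exact pvComp_subset n l r g0 x u hxin hux y hyu
    · exact ⟨bu ++ bv, List.mem_append_right _ (by simp),
        List.mem_append_left _ hubu, List.mem_append_right _ hvbv⟩
    · intro x y b hb hx hy
      by_cases h1 : b = bu
      · exact ⟨bu ++ bv, List.mem_append_right _ (by simp),
          List.mem_append_left _ (h1 ▸ hx), List.mem_append_left _ (h1 ▸ hy)⟩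
      by_cases h2 : b = bv
      · exact ⟨bu ++ bv, List.mem_append_right _ (by simp),
          List.mem_append_right _ (h2 ▸ hx), List.mem_append_right _ (h2 ▸ hy)⟩
      · exact ⟨b, List.mem_append_left _ (hmemfilter b hb h1 h2), hx, hy⟩

theorem pvPartFold_spec (n l r : Int) (g0 : List (List Int)) :
    ∀ (es : List ((Int × Int) × (Int × Int))) (P : List (List (Int × Int))),
      (∀ e ∈ es, e ∈ pvEdges n l r g0) → pvPart n l r g0 P →
      pvPart n l r g0 (es.foldl (fun P e => pvMergeB e.1 e.2 P) P) ∧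
      (∀ x y b, b ∈ P → x ∈ b → y ∈ b →
        ∃ b' ∈ es.foldl (fun P e => pvMergeB e.1 e.2 P) P, x ∈ b' ∧ y ∈ b') ∧
      (∀ e ∈ es, ∃ b ∈ es.foldl (fun P e => pvMergeB e.1 e.2 P) P, e.1 ∈ b ∧ e.2 ∈ b) := by
  intro es
  induction es with
  | nil =>
      intro P _ hP
      exact ⟨hP, fun x y b hb hx hy => ⟨b, hb, hx, hy⟩, by simp⟩
  | cons e es ih =>
      intro P hes hP
      obtain ⟨he1, hEe⟩ := pvEdges_mem_E n l r g0 e (hes e (by simp))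
      obtain ⟨hP1, hjoin1, hpersist1⟩ :=
        pvMergeB_spec n l r g0 e.1 e.2 he1 hEe.1 hEe P hP
      obtain ⟨hPf, hpersist2, hjoinrest⟩ := ih (pvMergeB e.1 e.2 P)
        (fun e' he' => hes e' (by simp [he'])) hP1
      rw [List.foldl_cons]
      refine ⟨hPf, ?_, ?_⟩
      · intro x y b hb hx hy
        obtain ⟨b', hb', hx', hy'⟩ := hpersist1 x y b hb hx hy
        exact hpersist2 x y b' hb' hx' hy'
      · intro e' he'
        rcases List.mem_cons.1 he' with h | h
        · subst h
          obtain ⟨b, hb, h1, h2⟩ := hjoin1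
          exact hpersist2 e'.1 e'.2 b hb h1 h2
        · exact hjoinrest e' h

theorem pvPartFinal_comp (n l r : Int) (g0 : List (List Int)) (b : List (Int × Int))
    (hb : b ∈ (pvEdges n l r g0).foldl (fun P e => pvMergeB e.1 e.2 P)
      ((pvCells n).map (fun c => [c])))
    (x : Int × Int) (hx : x ∈ b) :
    ∀ y, y ∈ b ↔ y ∈ pvComp n l r g0 x := by
  obtain ⟨hPf, _, hjoined⟩ := pvPartFold_spec n l r g0 (pvEdges n l r g0)
    ((pvCells n).map (fun c => [c])) (fun e he => he) (pvPart_init n l r g0)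
  have hxin : pvInR n x :=
    (mem_pvCells n x).1 ((hPf.cover x).1 (List.mem_flatten.2 ⟨b, hb, hx⟩))
  intro y
  constructor
  · intro hy
    exact hPf.sound b hb x hx y hy
  · intro hy
    refine pvComp_minimal n l r g0 x hxin (· ∈ b) hx ?_ y hy
    intro w z hw hEwz
    have hwin : pvInR n w :=
      (mem_pvCells n w).1 ((hPf.cover w).1 (List.mem_flatten.2 ⟨b, hb, hw⟩))
    rcases pvE_mem_edges n l r g0 w z hwin hEwz with hm | hm
    · obtain ⟨b', hb', h1, h2⟩ := hjoined (w, z) hm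
      rw [pvPart_unique n l r g0 _ hPf b b' hb hb' w hw h1]
      exact h2
    · obtain ⟨b', hb', h1, h2⟩ := hjoined (z, w) hm
      rw [pvPart_unique n l r g0 _ hPf b b' hb hb' w hw h2]
      exact h1


-- ===== the write phase of port B =====
theorem pvWriteB_fold (n l r : Int) (g0 : List (List Int)) :
    ∀ (Ps : List (List (Int × Int))) (ws : List (Int × Int)),
      (∀ b ∈ Ps, ∀ x ∈ b, pvInR n x) →
      (∀ b ∈ Ps, ∀ x ∈ b, PySem.Int.floordiv ((b.map (pvGetV g0)).sum) (PySem.List.len b)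
        = pvVal n l r g0 x) →
      (∀ a ∈ ws, pvInR n a) →
      (∀ a ∈ ws, ∀ b ∈ Ps, a ∉ b) →
      Ps.Pairwise (fun b b' => ∀ x, x ∈ b → x ∉ b') →
      Ps.foldl pvWriteB (ws.foldl (fun h a => pvSetCell h a (pvVal n l r g0 a)) g0)
        = (ws ++ Ps.flatten).foldl (fun h a => pvSetCell h a (pvVal n l r g0 a)) g0 := by
  intro Ps
  induction Ps with
  | nil =>
      intro ws _ _ _ _ _
      simp
  | cons b Ps ih =>
      intro ws hin hval hws hdisj hpair
      rw [List.foldl_cons]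
      have hread : ∀ x ∈ b, pvGetV (ws.foldl (fun h a => pvSetCell h a (pvVal n l r g0 a)) g0) x
          = pvGetV g0 x := by
        intro x hx
        have hxin := hin b (by simp) x hx
        exact pvGetV_writes_ne ws (pvVal n l r g0) g0 x hxin.1 hxin.2.2.1
          (fun a ha => by
            have hain := hws a ha
            exact ⟨hain.1, hain.2.2.1, fun h => hdisj a ha b (by simp) (h ▸ hx)⟩)
      have hstep : pvWriteB (ws.foldl (fun h a => pvSetCell h a (pvVal n l r g0 a)) g0) b
          = (ws ++ b).foldl (fun h a => pvSetCell h a (pvVal n l r g0 a)) g0 := by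
        show b.foldl (fun h c => pvSetCell h c
            (PySem.Int.floordiv ((b.map (fun c => pvGetV
              (ws.foldl (fun h a => pvSetCell h a (pvVal n l r g0 a)) g0) c)).sum)
              (PySem.List.len b)))
            (ws.foldl (fun h a => pvSetCell h a (pvVal n l r g0 a)) g0)
          = (ws ++ b).foldl (fun h a => pvSetCell h a (pvVal n l r g0 a)) g0
        rw [List.foldl_append]
        apply PySem.List.foldl_congr_mem
        intro acc x hx
        rw [List.map_congr_left (fun x hx => hread x hx)]
        rw [hval b (by simp) x hx]
      rw [hstep]
      have := ih (ws ++ b)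
        (fun b' hb' x hx => hin b' (by simp [hb']) x hx)
        (fun b' hb' x hx => hval b' (by simp [hb']) x hx)
        (fun a ha => by
          rcases List.mem_append.1 ha with h | h
          · exact hws a h
          · exact hin b (by simp) a h)
        (fun a ha b' hb' => by
          rcases List.mem_append.1 ha with h | h
          · exact hdisj a h b' (by simp [hb'])
          · exact (List.pairwise_cons.1 hpair).1 b' hb' a h)
        (List.pairwise_cons.1 hpair).2
      rw [this]
      congr 1
      simp

theorem pv_flatten_nodup (n l r : Int) (g0 : List (List Int)) (P : List (List (Int × Int)))
    (hP : pvPart n l r g0 P) : P.flatten.Nodup := by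
  rw [List.nodup_flatten]
  refine ⟨hP.nodups, ?_⟩
  apply List.Pairwise.imp_of_mem ?_ hP.disj
  intro a b _ _ hab x hxa hxb
  exact hab x hxa hxb

-- ===== the two days compute the same grid =====
theorem pvDayGrid_eq (n l r : Int) (g0 : List (List Int)) :
    (pvDayA n l r g0).2.2 =
      ((pvEdges n l r g0).foldl (fun P e => pvMergeB e.1 e.2 P)
        ((pvCells n).map (fun c => [c]))).foldl pvWriteB g0 := by
  obtain ⟨W, hWperm, hWform⟩ := pvDayA_grid n l r g0
  obtain ⟨hPf, _, _⟩ := pvPartFold_spec n l r g0 (pvEdges n l r g0)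
    ((pvCells n).map (fun c => [c])) (fun e he => he) (pvPart_init n l r g0)
  set P := (pvEdges n l r g0).foldl (fun P e => pvMergeB e.1 e.2 P)
    ((pvCells n).map (fun c => [c])) with hPdef
  have hbin : ∀ b ∈ P, ∀ x ∈ b, pvInR n x := by
    intro b hb x hx
    exact (mem_pvCells n x).1 ((hPf.cover x).1 (List.mem_flatten.2 ⟨b, hb, hx⟩))
  have hval : ∀ b ∈ P, ∀ x ∈ b,
      PySem.Int.floordiv ((b.map (pvGetV g0)).sum) (PySem.List.len b) = pvVal n l r g0 x := by
    intro b hb x hx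
    have hxin := hbin b hb x hx
    have hperm : b.Perm (pvComp n l r g0 x) :=
      (List.perm_ext_iff_of_nodup (hPf.nodups b hb)
        (pvComp_nodup n l r g0 x hxin)).2 (pvPartFinal_comp n l r g0 b hb x hx)
    unfold pvVal
    rw [(hperm.map (pvGetV g0)).sum_eq]
    simp [PySem.List.len_eq, hperm.length_eq]
  have hwrite := pvWriteB_fold n l r g0 P [] hbin hval (by simp) (by simp) hPf.disj
  simp only [List.foldl_nil, List.nil_append] at hwrite
  rw [hwrite, hWform]
  have hflperm : P.flatten.Perm (pvCells n) := by
    refine (List.perm_ext_iff_of_nodup (pv_flatten_nodup n l r g0 P hPf)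
      (nodup_pvCells n)).2 ?_
    exact hPf.cover
  have hperm2 : W.Perm P.flatten := hWperm.trans hflperm.symm
  apply List.Perm.foldl_eq' hperm2
  intro x hx y hy z
  have hxin : pvInR n x := (mem_pvCells n x).1 (hWperm.mem_iff.1 hx)
  have hyin : pvInR n y := (mem_pvCells n y).1 (hWperm.mem_iff.1 hy)
  exact pvSetCell_comm2 z x y _ _ hxin.1 hxin.2.2.1 hyin.1 hyin.2.2.1
    (fun h => by rw [h])

-- ===== the day loops agree =====
theorem pv_loop_eq (n l r : Int) (hn : 0 ≤ n) :
    ∀ (fuel : Nat) (g : List (List Int)) (day : Int),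
      pvLoopA n l r fuel g day = pvLoopB n l r fuel g day := by
  intro fuel
  induction fuel with
  | zero => intro g day; rfl
  | succ fuel ih =>
      intro g day
      show (let day := day + 1
            let res := pvDayA n l r g
            if res.1 = n * n then day else pvLoopA n l r fuel res.2.2 day)
        = (let day := day + 1
           let es := pvEdges n l r g
           if es = [] then day
           else
             let P := es.foldl (fun P e => pvMergeB e.1 e.2 P) ((pvCells n).map (fun c => [c]))
             pvLoopB n l r fuel (P.foldl pvWriteB g) day)
      simp only []
      by_cases hne : pvNoEdge n l r g
      · rw [if_pos ((pvDayA_stable_iff n l r g hn).2 hne),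
          if_pos ((pvEdges_nil_iff n l r g).2 hne)]
      · rw [if_neg (fun h => hne ((pvDayA_stable_iff n l r g hn).1 h)),
          if_neg (fun h => hne ((pvEdges_nil_iff n l r g).1 h))]
        rw [pvDayGrid_eq n l r g]
        exact ih _ _

-- ===== VERDICT (by name: the statement is the Claim_ definition above) =====
theorem solution_spec : Claim_equal_solution := by
  intro n l r A _ hpre
  unfold Spec_solution solution solution_alt
  exact pv_loop_eq n l r hpre.1 (pvFuel n A) A (-1)
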